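-- pv_equiv track=rewrite | github.com/mortyc126-debug/rayon | src/treewidth_attack.py | compute_treewidth_upper_bound
-- ===== SOURCE A (Python) =====
-- from collections import defaultdict
--
-- def compute_treewidth_upper_bound(n, gates):
--     """Upper bound on treewidth via elimination ordering.
--
--     Build the undirected graph of the circuit DAG.
--     Use greedy elimination to get upper bound on treewidth.
--     """
--     # Build adjacency from gates
--     adj = defaultdict(set)
--     all_nodes = set(range(n))  # inputs
--
--     for gi, (gtype, inp1, inp2, out) in enumerate(gates):
--         all_nodes.add(out)
--         adj[inp1].add(out)
--         adj[out].add(inp1)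
--         if inp2 >= 0:
--             adj[inp2].add(out)
--             adj[out].add(inp2)
--
--     # Greedy elimination: remove node with min degree, add edges between neighbors
--     nodes = set(all_nodes)
--     tw = 0
--
--     while nodes:
--         # Find min degree node
--         min_deg = float('inf')
--         min_node = None
--         for v in nodes:
--             deg = len(adj[v] & nodes)
--             if deg < min_deg:
--                 min_deg = deg
--                 min_node = v
--
--         # Eliminate: connect all neighbors
--         neighbors = adj[min_node] & nodes
--         tw = max(tw, len(neighbors))
--
--         for u in neighbors:
--             for w in neighbors:
--                 if u != w:
--                     adj[u].add(w)
--                     adj[w].add(u)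
--
--         nodes.remove(min_node)
--
--     return tw
-- ===== SOURCE B (Python) =====
-- def compute_treewidth_upper_bound(n, gates):
--     """Upper bound on treewidth via greedy elimination, over bitset adjacency.
--
--     Nodes are mapped to bit positions; adjacency rows, the alive set and each
--     eliminated neighborhood are integer bitmasks.  Degrees are maintained
--     incrementally in an array (never recomputed per round): eliminating a node
--     costs one mask update and popcount per neighbor, and the next node is the
--     first minimum of the degree array over the alive list.
--     """
--     all_nodes = set(range(n))
--     for _gtype, _inp1, _inp2, out in gates:
--         all_nodes.add(out)
--     order = list(set(all_nodes))
--     idx = {v: i for i, v in enumerate(order)}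
--     k = len(order)
--
--     adjm = [0] * k
--     for _gtype, inp1, inp2, out in gates:
--         o = idx[out]
--         if inp1 in idx:
--             a = idx[inp1]
--             adjm[a] |= 1 << o
--             adjm[o] |= 1 << a
--         if inp2 >= 0 and inp2 in idx:
--             b = idx[inp2]
--             adjm[b] |= 1 << o
--             adjm[o] |= 1 << b
--
--     deg = [row.bit_count() for row in adjm]   # current degree of every alive node
--     alive = (1 << k) - 1
--     alive_list = list(range(k))               # alive bit positions, in order
--     tw = 0
--     while alive_list:
--         best = min(alive_list, key=lambda i: deg[i])   # first index of minimal degree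
--         bd = deg[best]
--         if bd > tw:
--             tw = bd
--         alive ^= 1 << best
--         S = adjm[best] & alive                # still-alive neighborhood of best
--         rem = S
--         while rem:                            # clique S: one OR + popcount per neighbor
--             u = rem.bit_length() - 1
--             add = S ^ (S & (adjm[u] | 1 << u))    # new neighbors of u: S minus adjm[u] minus u
--             adjm[u] |= add
--             deg[u] += add.bit_count() - 1         # gains add, loses the eliminated node
--             rem ^= 1 << u
--         alive_list.remove(best)
--     return tw
-- ===== Notes on version B (the rewrite author's own statement) =====
-- stated objective: faster
-- what changed: B represents the graph as integer bitmask rows and maintains a degree array incrementally: a round picks the first minimum of the degree array instead of re-intersecting every adjacency set with the alive set, and eliminating a node cliques its whole neighborhood with one OR plus one popcount per neighbor instead of a pairwise double loop.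
import Mathlib
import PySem

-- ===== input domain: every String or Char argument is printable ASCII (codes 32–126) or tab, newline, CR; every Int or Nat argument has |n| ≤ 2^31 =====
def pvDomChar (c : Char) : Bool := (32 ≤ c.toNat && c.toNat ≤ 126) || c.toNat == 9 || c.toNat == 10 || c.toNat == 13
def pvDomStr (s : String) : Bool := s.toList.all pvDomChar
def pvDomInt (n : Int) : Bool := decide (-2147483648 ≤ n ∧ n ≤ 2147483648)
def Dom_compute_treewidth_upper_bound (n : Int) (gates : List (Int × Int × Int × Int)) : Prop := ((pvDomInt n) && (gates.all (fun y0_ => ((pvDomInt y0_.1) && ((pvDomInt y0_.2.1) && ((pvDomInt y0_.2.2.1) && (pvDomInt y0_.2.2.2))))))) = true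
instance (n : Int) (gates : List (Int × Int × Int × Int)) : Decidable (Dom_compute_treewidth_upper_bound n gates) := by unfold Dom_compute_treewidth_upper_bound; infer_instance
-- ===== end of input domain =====

-- B replaces the per-round set intersections with bitset adjacency rows and an incrementally
-- maintained degree array: eliminating a node costs one mask update and popcount per neighbor
-- and the next node is the first minimum of the degree array (objective: faster).

-- ===== SHARED INPUT-PARSING HELPERS (used by both ports) =====
-- Model of CPython's set-of-int iteration order (open addressing, table sizes a power of two,
-- LINEAR_PROBES = 9, perturbed probing, growth at fill*5 >= mask*3). Exact for int elements:
-- hash(v) = v (hash(-1) = -2) is deterministic, so the scan order of the Python sets below is a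
-- pure function of the insertion sequence; this model reproduces it step for step.
def pyHash (v : Int) : Int := if v = -1 then -2 else v

-- scan a probe window: first empty slot or a slot holding `key`
def pvScanWin (t : List (Option Int)) (key : Int) : Nat → Nat → Option (Nat × Bool)
  | _, 0 => none
  | i, c+1 =>
    match t[i]? with
    | some none => some (i, false)
    | some (some k) => if k = key then some (i, true) else pvScanWin t key (i+1) c
    | none => pvScanWin t key (i+1) c   -- out of range: unreachable (probe windows stay inside the table)

def pvFindSlot (t : List (Option Int)) (key : Int) : Nat → Nat → Nat → Option (Nat × Bool)
  | 0, _, _ => none                      -- fuel exhausted: unreachable (the probe sequence finds an empty slot)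
  | f+1, i, p =>
    let probes := if i + 9 ≤ t.length - 1 then 9 else 0
    match pvScanWin t key i (probes+1) with
    | some r => some r
    | none => pvFindSlot t key f ((i*5+1+(p >>> 5)) % t.length) (p >>> 5)

def pvFirstNone (t : List (Option Int)) : Nat → Nat → Option Nat
  | _, 0 => none
  | i, c+1 =>
    match t[i]? with
    | some none => some i
    | some (some _) => pvFirstNone t (i+1) c
    | none => pvFirstNone t (i+1) c

def pvInsertCleanGo (t : List (Option Int)) (key : Int) : Nat → Nat → Nat → List (Option Int)
  | 0, _, _ => t
  | f+1, i, p =>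
    let probes := if i + 9 ≤ t.length - 1 then 9 else 0
    match pvFirstNone t i (probes+1) with
    | some j => t.set j (some key)
    | none => pvInsertCleanGo t key f ((i*5+1+(p >>> 5)) % t.length) (p >>> 5)

def pvInsertClean (t : List (Option Int)) (key : Int) : List (Option Int) :=
  pvInsertCleanGo t key (t.length + 80) ((pyHash key % (t.length : Int)).toNat) ((pyHash key % ((2:Int)^64)).toNat)

def pvGrowSizeGo : Nat → Nat → Nat → Nat
  | 0, s, _ => s
  | f+1, s, m => if s ≤ m then pvGrowSizeGo f (2*s) m else s

def pvGrowSize (minused : Nat) : Nat := pvGrowSizeGo 64 8 minused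

def pvAddKey (st : List (Option Int) × Nat) (key : Int) : List (Option Int) × Nat :=
  let t := st.1
  let h := pyHash key
  match pvFindSlot t key (t.length + 80) ((h % (t.length : Int)).toNat) ((h % ((2:Int)^64)).toNat) with
  | none => st
  | some (_, true) => st
  | some (j, false) =>
    let t1 := t.set j (some key)
    let fill := st.2 + 1
    if fill*5 ≥ (t1.length - 1)*3 then
      (((t1.filterMap id).foldl pvInsertClean
          (List.replicate (pvGrowSize (if fill ≤ 50000 then fill*4 else fill*2)) none)), fill)
    else (t1, fill)

-- list(nodes) where nodes = set(all_nodes), all_nodes = set(range(n)) plus every gate output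
def pyNodesOrder (n : Int) (gates : List (Int × Int × Int × Int)) : List Int :=
  let keys := PySem.List.dedup ((List.range n.toNat).map (Int.ofNat) ++ gates.map (fun g => g.2.2.2))
  let st := keys.foldl pvAddKey (List.replicate 8 none, 0)
  let newsize := if st.2*5 ≥ 21 then pvGrowSize (2*st.2) else 8    -- set(all_nodes): presize on merge …
  let nt := if newsize = st.1.length then st.1                      -- … same table size: CPython copies slots directly
            else (st.1.filterMap id).foldl pvInsertClean (List.replicate newsize none)
  nt.filterMap id

-- function update: the mutation dict[a].add(…) / dict[a] = … on an adjacency map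
def updF (f : Int → List Int) (a : Int) (xs : List Int) : Int → List Int :=
  fun x => if x = a then xs else f x

-- ===== PORT A =====
-- first node of minimal degree in scan order (A's 5-line min scan)
def pvScanMin (deg : Int → Nat) (ns : List Int) : Option (Nat × Int) :=
  ns.foldl (fun s v =>
    match s with
    | none => some (deg v, v)
    | some (d, mn) => if deg v < d then some (deg v, v) else some (d, mn)) none

def pvBuildAdjA (gates : List (Int × Int × Int × Int)) : Int → List Int :=
  gates.foldl (fun adj g =>
    let adj1 := updF adj g.2.1 (PySem.Set.add (adj g.2.1) g.2.2.2)
    let adj2 := updF adj1 g.2.2.2 (PySem.Set.add (adj1 g.2.2.2) g.2.1)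
    if g.2.2.1 ≥ 0 then
      let adj3 := updF adj2 g.2.2.1 (PySem.Set.add (adj2 g.2.2.1) g.2.2.2)
      updF adj3 g.2.2.2 (PySem.Set.add (adj3 g.2.2.2) g.2.2.1)
    else adj2) (fun _ => [])

-- fuel = the number of nodes: each pass of Python's `while nodes` removes exactly one node
def pvElimAGo (fuel : Nat) (adj : Int → List Int) (ns : List Int) (tw : Int) : Int :=
  match fuel with
  | 0 => tw
  | f+1 =>
    match pvScanMin (fun v => (PySem.Set.inter (adj v) ns).length) ns with
    | none => tw
    | some (_, m) =>
      let neighbors := PySem.Set.inter (adj m) ns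
      let tw' := max tw (neighbors.length : Int)
      let adj' := neighbors.foldl (fun a u =>
          neighbors.foldl (fun a w =>
            if u ≠ w then
              let a1 := updF a u (PySem.Set.add (a u) w)
              updF a1 w (PySem.Set.add (a1 w) u)
            else a) a) adj
      pvElimAGo f adj' (ns.erase m) tw'

def compute_treewidth_upper_bound (n : Int) (gates : List (Int × Int × Int × Int)) : Int :=
  pvElimAGo (pyNodesOrder n gates).length (pvBuildAdjA gates) (pyNodesOrder n gates) 0

-- ===== PORT B =====
-- "adjm[i] |= m"  (every written index is produced by idx, hence in range)
def pvRowOr (adjm : List Int) (i : Nat) (m : Int) : List Int :=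
  adjm.set i (PySem.Int.bor (adjm.getD i 0) m)

-- "if x in idx: a = idx[x]; adjm[a] |= 1 << o; adjm[o] |= 1 << a"
-- (order has no duplicates, so the dict lookup idx[x] is the first index of x in order)
def pvEdgeBit (order : List Int) (adjm : List Int) (x : Int) (o : Nat) : List Int :=
  if x ∈ order then
    pvRowOr (pvRowOr adjm (order.idxOf x) ((1:Int) <<< o)) o ((1:Int) <<< (order.idxOf x))
  else adjm

def pvBuildBit (order : List Int) (gates : List (Int × Int × Int × Int)) : List Int :=
  gates.foldl (fun am g =>
    if g.2.2.2 ∈ order then    -- "o = idx[out]": out is always a key of idx in Python; guard only makes the lookup total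
      let o := order.idxOf g.2.2.2
      let am1 := pvEdgeBit order am g.2.1 o
      if g.2.2.1 ≥ 0 then pvEdgeBit order am1 g.2.2.1 o else am1
    else am)
    (List.replicate order.length 0)

-- "deg = [row.bit_count() for row in adjm]"
def pvDegInit (adjm : List Int) : List Int :=
  adjm.map (fun row => (PySem.Int.bitCount row : Int))

-- "while rem: u = rem.bit_length() - 1; add = S ^ (S & (adjm[u] | 1 << u));
--  adjm[u] |= add; deg[u] += add.bit_count() - 1; rem ^= 1 << u"
-- fuel = k: rem ⊆ S < 2^k has at most k set bits and each pass clears one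
def pvElimInner : Nat → Int → Int → List Int → List Int → List Int × List Int
  | 0, _, _, adjm, deg => (adjm, deg)
  | f+1, S, rem, adjm, deg =>
    if rem ≠ 0 then
      let u := PySem.Int.bitLength rem - 1
      let add := PySem.Int.bxor S (PySem.Int.band S (PySem.Int.bor (adjm.getD u 0) ((1:Int) <<< u)))
      let adjm' := adjm.set u (PySem.Int.bor (adjm.getD u 0) add)
      let deg' := deg.set u (deg.getD u 0 + (PySem.Int.bitCount add : Int) - 1)
      pvElimInner f S (PySem.Int.bxor rem ((1:Int) <<< u)) adjm' deg'
    else (adjm, deg)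

-- "while alive_list:" — fuel = k: each pass removes one element of alive_list
def pvElimGo : Nat → Nat → List Int → List Int → Int → List Nat → Int → Int
  | 0, _, _, _, _, _, tw => tw
  | f+1, k, adjm, deg, alive, aliveL, tw =>
    match aliveL with
    | [] => tw
    | _ :: _ =>
      let best := PySem.List.minD aliveL (fun i => deg.getD i 0) 0  -- min(alive_list, key=…): first minimum of a nonempty list
      let bd := deg.getD best 0
      let tw' := if bd > tw then bd else tw
      let alive' := PySem.Int.bxor alive ((1:Int) <<< best)         -- alive ^= 1 << best
      let S := PySem.Int.band (adjm.getD best 0) alive'             -- adjm[best] & alive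
      let p := pvElimInner k S S adjm deg
      let aliveL' := (PySem.List.remove? aliveL best).getD aliveL   -- alive_list.remove(best): best is a member
      pvElimGo f k p.1 p.2 alive' aliveL' tw'

def compute_treewidth_upper_bound_alt (n : Int) (gates : List (Int × Int × Int × Int)) : Int :=
  let order := pyNodesOrder n gates
  let k := order.length
  let adjm := pvBuildBit order gates
  pvElimGo k k adjm (pvDegInit adjm) ((1:Int) <<< k - 1) (List.range k) 0

-- ===== PRECONDITION & SPEC =====
def Spec_compute_treewidth_upper_bound (n : Int) (gates : List (Int × Int × Int × Int)) (out : Int) : Prop := out = compute_treewidth_upper_bound_alt n gates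
instance (n : Int) (gates : List (Int × Int × Int × Int)) (out : Int) : Decidable (Spec_compute_treewidth_upper_bound n gates out) := by unfold Spec_compute_treewidth_upper_bound; infer_instance

-- ===== CLAIM (what is proved, stated in full; the proofs are below) =====
def Claim_equal_compute_treewidth_upper_bound : Prop := ∀ (n : Int) (gates : List (Int × Int × Int × Int)), Dom_compute_treewidth_upper_bound n gates → Spec_compute_treewidth_upper_bound n gates (compute_treewidth_upper_bound n gates)

-- ===== LEMMAS AND PROOFS =====

-- ---- the node-order list has no duplicates ----
lemma pvScanWin_empty (t : List (Option Int)) (key : Int) :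
    ∀ c i j, pvScanWin t key i c = some (j, false) → t[j]? = some none := by
  intro c
  induction c with
  | zero => intro i j h; simp [pvScanWin] at h
  | succ c ih =>
    intro i j h
    rw [pvScanWin] at h
    split at h
    · cases h; assumption
    · split at h
      · cases h
      · exact ih _ _ h
    · exact ih _ _ h

lemma pvFindSlot_empty (t : List (Option Int)) (key : Int) :
    ∀ f i p j, pvFindSlot t key f i p = some (j, false) → t[j]? = some none := by
  intro f
  induction f with
  | zero => intro i p j h; simp [pvFindSlot] at h
  | succ f ih =>
    intro i p j h
    rw [pvFindSlot] at h
    split at h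
    · rename_i r heq; cases h; exact pvScanWin_empty t key _ _ _ heq
    · exact ih _ _ _ h

lemma pvFirstNone_empty (t : List (Option Int)) :
    ∀ c i j, pvFirstNone t i c = some j → t[j]? = some none := by
  intro c
  induction c with
  | zero => intro i j h; simp [pvFirstNone] at h
  | succ c ih =>
    intro i j h
    rw [pvFirstNone] at h
    split at h
    · cases h; assumption
    · exact ih _ _ h
    · exact ih _ _ h

lemma filterMap_set_perm :
    ∀ (t : List (Option Int)) (j : Nat) (k : Int), t[j]? = some none →
      ((t.set j (some k)).filterMap id).Perm (k :: t.filterMap id) := by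
  intro t
  induction t with
  | nil => intro j k h; simp at h
  | cons o rest ih =>
    intro j k h
    cases j with
    | zero =>
      simp only [List.getElem?_cons_zero, Option.some.injEq] at h
      subst h
      simp
    | succ j =>
      simp only [List.getElem?_cons_succ] at h
      cases o with
      | none =>
        simpa [List.filterMap_cons] using ih j k h
      | some a =>
        simp only [List.set_cons_succ, List.filterMap_cons, id]
        exact ((ih j k h).cons a).trans (List.Perm.swap k a _)

lemma pvInsertCleanGo_cases (t : List (Option Int)) (key : Int) :
    ∀ f i p, pvInsertCleanGo t key f i p = t ∨
      ∃ j, t[j]? = some none ∧ pvInsertCleanGo t key f i p = t.set j (some key) := by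
  intro f
  induction f with
  | zero => intro i p; left; rw [pvInsertCleanGo]
  | succ f ih =>
    intro i p
    rw [pvInsertCleanGo]
    split
    · rename_i j heq
      exact Or.inr ⟨j, pvFirstNone_empty t _ _ _ heq, rfl⟩
    · exact ih _ _

lemma pvInsertClean_spec (t : List (Option Int)) (key : Int)
    (hnd : (t.filterMap id).Nodup) (hkey : key ∉ t.filterMap id) :
    ((pvInsertClean t key).filterMap id).Nodup ∧
      ∀ x ∈ (pvInsertClean t key).filterMap id, x ∈ key :: t.filterMap id := by
  rcases pvInsertCleanGo_cases t key (t.length + 80) ((pyHash key % (t.length : Int)).toNat)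
      ((pyHash key % ((2:Int)^64)).toNat) with h | ⟨j, hj, h⟩ <;>
    rw [pvInsertClean]
  · rw [h]; exact ⟨hnd, fun x hx => List.mem_cons_of_mem _ hx⟩
  · rw [h]
    have hperm := filterMap_set_perm t j key hj
    constructor
    · exact hperm.nodup_iff.mpr (List.nodup_cons.mpr ⟨hkey, hnd⟩)
    · intro x hx; exact hperm.mem_iff.mp hx

-- generic fold: a step that only adds its key keeps the collected keys duplicate-free
lemma foldStep_nodup {α : Type} (step : α → Int → α) (fm : α → List Int)
    (hstep : ∀ t key, (fm t).Nodup → key ∉ fm t →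
      (fm (step t key)).Nodup ∧ ∀ x ∈ fm (step t key), x ∈ key :: fm t) :
    ∀ (L : List Int) (t : α), (fm t ++ L).Nodup →
      (fm (L.foldl step t)).Nodup ∧ ∀ x ∈ fm (L.foldl step t), x ∈ fm t ++ L := by
  intro L
  induction L with
  | nil =>
    intro t h
    refine ⟨by simpa using h, fun x hx => by simpa using hx⟩
  | cons key L ih =>
    intro t h
    have h' := (List.nodup_append.mp h)
    have hknotin : key ∉ fm t := by
      intro hk
      exact h'.2.2 key hk key (List.mem_cons_self ..) rfl
    have hnd : (fm t).Nodup := h'.1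
    obtain ⟨hs1, hs2⟩ := hstep t key hnd hknotin
    have hnext : (fm (step t key) ++ L).Nodup := by
      rw [List.nodup_append]
      refine ⟨hs1, (List.nodup_cons.mp h'.2.1).2, ?_⟩
      intro a ha b hb
      rcases List.mem_cons.mp (hs2 a ha) with h1 | h1
      · subst h1; exact fun hab => (List.nodup_cons.mp h'.2.1).1 (hab ▸ hb)
      · exact h'.2.2 a h1 b (List.mem_cons_of_mem _ hb)
    obtain ⟨hr1, hr2⟩ := ih (step t key) hnext
    refine ⟨hr1, ?_⟩
    intro x hx
    rcases List.mem_append.mp (hr2 x hx) with h1 | h1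
    · rcases List.mem_cons.mp (hs2 x h1) with h2 | h2
      · subst h2; simp
      · exact List.mem_append.mpr (Or.inl h2)
    · simp [h1]

lemma filterMap_replicate_none (n : Nat) :
    ((List.replicate n (none : Option Int)).filterMap id) = [] := by
  induction n with
  | zero => rfl
  | succ n ih => simp

lemma pvAddKey_spec (st : List (Option Int) × Nat) (key : Int)
    (hnd : (st.1.filterMap id).Nodup) (hkey : key ∉ st.1.filterMap id) :
    ((pvAddKey st key).1.filterMap id).Nodup ∧
      ∀ x ∈ (pvAddKey st key).1.filterMap id, x ∈ key :: st.1.filterMap id := by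
  rw [pvAddKey]
  split
  · exact ⟨hnd, fun x hx => List.mem_cons_of_mem _ hx⟩
  · exact ⟨hnd, fun x hx => List.mem_cons_of_mem _ hx⟩
  · rename_i j heq
    have hj := pvFindSlot_empty st.1 key _ _ _ _ heq
    have hperm := filterMap_set_perm st.1 j key hj
    have hnd1 : ((st.1.set j (some key)).filterMap id).Nodup :=
      hperm.nodup_iff.mpr (List.nodup_cons.mpr ⟨hkey, hnd⟩)
    have hmem1 : ∀ x ∈ (st.1.set j (some key)).filterMap id, x ∈ key :: st.1.filterMap id :=
      fun x hx => hperm.mem_iff.mp hx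
    dsimp only
    split
    · -- resize: clean-reinsert every key into a fresh larger table
      have hfold := foldStep_nodup pvInsertClean (fun t => t.filterMap id)
        (fun t k hk1 hk2 => pvInsertClean_spec t k hk1 hk2)
        ((st.1.set j (some key)).filterMap id)
        (List.replicate (pvGrowSize (if st.2 + 1 ≤ 50000 then (st.2+1)*4 else (st.2+1)*2)) none)
        (by simp only [filterMap_replicate_none, List.nil_append]; exact hnd1)
      simp only [filterMap_replicate_none, List.nil_append] at hfold
      exact ⟨hfold.1, fun x hx => hmem1 x (hfold.2 x hx)⟩
    · exact ⟨hnd1, hmem1⟩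

lemma pyNodesOrder_nodup (n : Int) (gates : List (Int × Int × Int × Int)) :
    (pyNodesOrder n gates).Nodup := by
  rw [pyNodesOrder]
  have hfold := foldStep_nodup pvAddKey (fun st => st.1.filterMap id)
    (fun t k hk1 hk2 => pvAddKey_spec t k hk1 hk2)
    (PySem.List.dedup ((List.range n.toNat).map (Int.ofNat) ++ gates.map (fun g => g.2.2.2)))
    (List.replicate 8 none, 0)
    (by simp only [filterMap_replicate_none, List.nil_append]; exact PySem.List.nodup_dedup _)
  have h1 : ((List.foldl pvAddKey (List.replicate 8 none, 0)
      (PySem.List.dedup ((List.range n.toNat).map (Int.ofNat) ++ gates.map (fun g => g.2.2.2)))).1.filterMap id).Nodup := hfold.1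
  have hgen : ∀ z : Nat, ((List.foldl pvInsertClean (List.replicate z none)
      ((List.foldl pvAddKey (List.replicate 8 none, 0)
        (PySem.List.dedup ((List.range n.toNat).map (Int.ofNat) ++ gates.map (fun g => g.2.2.2)))).1.filterMap id)).filterMap id).Nodup := by
    intro z
    have hclean := foldStep_nodup pvInsertClean (fun t => t.filterMap id)
      (fun t k hk1 hk2 => pvInsertClean_spec t k hk1 hk2)
      _ (List.replicate z none)
      (by simp only [filterMap_replicate_none, List.nil_append]; exact h1)
    exact hclean.1
  split <;> split
  · exact h1
  · exact hgen _
  · exact h1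
  · exact hgen _

-- ---- membership characterisations of A's update folds ----
lemma mem_updAdd (a : Int → List Int) (x y v z : Int) :
    z ∈ (updF a x (PySem.Set.add (a x) y)) v ↔ z ∈ a v ∨ (v = x ∧ z = y) := by
  simp only [updF]
  split
  · rename_i h; subst h; rw [PySem.Set.mem_add]; tauto
  · tauto

lemma nodup_updF (a : Int → List Int) (x : Int) (xs : List Int)
    (h : ∀ v, (a v).Nodup) (hxs : xs.Nodup) : ∀ v, ((updF a x xs) v).Nodup := by
  intro v; simp only [updF]; split
  · exact hxs
  · exact h v

lemma nodup_updAdd (a : Int → List Int) (x y : Int) (h : ∀ v, (a v).Nodup) :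
    ∀ v, ((updF a x (PySem.Set.add (a x) y)) v).Nodup :=
  nodup_updF a x _ h (PySem.Set.nodup_add _ _ (h x))

lemma memPairStep (a : Int → List Int) (u w v z : Int) :
    z ∈ ((if u ≠ w then
            let a1 := updF a u (PySem.Set.add (a u) w)
            updF a1 w (PySem.Set.add (a1 w) u)
          else a) v) ↔ z ∈ a v ∨ (u ≠ w ∧ ((v = u ∧ z = w) ∨ (v = w ∧ z = u))) := by
  split
  · rename_i hne
    rw [mem_updAdd, mem_updAdd]
    tauto
  · rename_i hne; tauto

lemma nodupPairStep (a : Int → List Int) (u w : Int) (h : ∀ v, (a v).Nodup) :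
    ∀ v, (((if u ≠ w then
            let a1 := updF a u (PySem.Set.add (a u) w)
            updF a1 w (PySem.Set.add (a1 w) u)
          else a)) v).Nodup := by
  split
  · exact nodup_updAdd _ _ _ (nodup_updAdd _ _ _ h)
  · exact h

lemma memInnerFold (N : List Int) (u : Int) :
    ∀ (a : Int → List Int) (v z : Int),
      z ∈ ((N.foldl (fun a w =>
            if u ≠ w then
              let a1 := updF a u (PySem.Set.add (a u) w)
              updF a1 w (PySem.Set.add (a1 w) u)
            else a) a) v)
      ↔ z ∈ a v ∨ ∃ w ∈ N, u ≠ w ∧ ((v = u ∧ z = w) ∨ (v = w ∧ z = u)) := by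
  induction N with
  | nil => intro a v z; simp
  | cons w0 N ih =>
    intro a v z
    rw [List.foldl_cons, ih, memPairStep]
    simp only [List.mem_cons]
    constructor
    · rintro ((h | h) | ⟨w, hw, hp⟩)
      · exact Or.inl h
      · exact Or.inr ⟨w0, Or.inl rfl, h⟩
      · exact Or.inr ⟨w, Or.inr hw, hp⟩
    · rintro (h | ⟨w, (rfl | hw), hp⟩)
      · exact Or.inl (Or.inl h)
      · exact Or.inl (Or.inr hp)
      · exact Or.inr ⟨w, hw, hp⟩

lemma nodupInnerFold (N : List Int) (u : Int) :
    ∀ (a : Int → List Int), (∀ v, (a v).Nodup) →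
      ∀ v, ((N.foldl (fun a w =>
            if u ≠ w then
              let a1 := updF a u (PySem.Set.add (a u) w)
              updF a1 w (PySem.Set.add (a1 w) u)
            else a) a) v).Nodup := by
  induction N with
  | nil => intro a h v; exact h v
  | cons w0 N ih =>
    intro a h v
    exact ih _ (nodupPairStep a u w0 h) v

lemma memOuterAux (N : List Int) :
    ∀ (l : List Int) (a : Int → List Int) (v z : Int),
      z ∈ ((l.foldl (fun a u =>
          N.foldl (fun a w =>
            if u ≠ w then
              let a1 := updF a u (PySem.Set.add (a u) w)
              updF a1 w (PySem.Set.add (a1 w) u)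
            else a) a) a) v)
      ↔ z ∈ a v ∨ ∃ u ∈ l, ∃ w ∈ N, u ≠ w ∧ ((v = u ∧ z = w) ∨ (v = w ∧ z = u)) := by
  intro l
  induction l with
  | nil => intro a v z; simp
  | cons u0 l ih =>
    intro a v z
    rw [List.foldl_cons, ih, memInnerFold]
    simp only [List.mem_cons]
    constructor
    · rintro ((h | ⟨w, hw, hp⟩) | ⟨u, hu, hrest⟩)
      · exact Or.inl h
      · exact Or.inr ⟨u0, Or.inl rfl, w, hw, hp⟩
      · exact Or.inr ⟨u, Or.inr hu, hrest⟩
    · rintro (h | ⟨u, (rfl | hu), hrest⟩)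
      · exact Or.inl (Or.inl h)
      · exact Or.inl (Or.inr hrest)
      · exact Or.inr ⟨u, hu, hrest⟩

lemma memOuterFold (N : List Int) (adj : Int → List Int) (v z : Int) :
    z ∈ ((N.foldl (fun a u =>
          N.foldl (fun a w =>
            if u ≠ w then
              let a1 := updF a u (PySem.Set.add (a u) w)
              updF a1 w (PySem.Set.add (a1 w) u)
            else a) a) adj) v)
      ↔ z ∈ adj v ∨ (v ∈ N ∧ z ∈ N ∧ v ≠ z) := by
  rw [memOuterAux]
  constructor
  · rintro (h | ⟨u, hu, w, hw, hne, (⟨rfl, rfl⟩ | ⟨rfl, rfl⟩)⟩)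
    · exact Or.inl h
    · exact Or.inr ⟨hu, hw, hne⟩
    · exact Or.inr ⟨hw, hu, Ne.symm hne⟩
  · rintro (h | ⟨hv, hz, hne⟩)
    · exact Or.inl h
    · exact Or.inr ⟨v, hv, z, hz, hne, Or.inl ⟨rfl, rfl⟩⟩

lemma nodupOuterFold (N : List Int) :
    ∀ (l : List Int) (a : Int → List Int), (∀ v, (a v).Nodup) →
      ∀ v, ((l.foldl (fun a u =>
          N.foldl (fun a w =>
            if u ≠ w then
              let a1 := updF a u (PySem.Set.add (a u) w)
              updF a1 w (PySem.Set.add (a1 w) u)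
            else a) a) a) v).Nodup := by
  intro l
  induction l with
  | nil => intro a h v; exact h v
  | cons u0 l ih =>
    intro a h v
    exact ih _ (fun v' => nodupInnerFold N u0 a h v') v

lemma memStepA (adj : Int → List Int) (g : Int × Int × Int × Int) (v z : Int) :
    z ∈ ((let adj1 := updF adj g.2.1 (PySem.Set.add (adj g.2.1) g.2.2.2)
          let adj2 := updF adj1 g.2.2.2 (PySem.Set.add (adj1 g.2.2.2) g.2.1)
          if g.2.2.1 ≥ 0 then
            let adj3 := updF adj2 g.2.2.1 (PySem.Set.add (adj2 g.2.2.1) g.2.2.2)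
            updF adj3 g.2.2.2 (PySem.Set.add (adj3 g.2.2.2) g.2.2.1)
          else adj2) v)
    ↔ z ∈ adj v ∨ (((v = g.2.1 ∧ z = g.2.2.2) ∨ (v = g.2.2.2 ∧ z = g.2.1)) ∨
        (g.2.2.1 ≥ 0 ∧ ((v = g.2.2.1 ∧ z = g.2.2.2) ∨ (v = g.2.2.2 ∧ z = g.2.2.1)))) := by
  split
  · rename_i hge
    rw [mem_updAdd, mem_updAdd, mem_updAdd, mem_updAdd]
    tauto
  · rename_i hge
    rw [mem_updAdd, mem_updAdd]
    tauto

-- ---- small bit/list bridges ----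
lemma getD_castRows (l : List Nat) (i : Nat) :
    (l.map (fun (m : Nat) => (m : Int))).getD i 0 = ((l.getD i 0 : Nat) : Int) := by
  induction l generalizing i with
  | nil => simp
  | cons a l ih =>
    cases i with
    | zero => rfl
    | succ n => exact ih n

lemma shift1_cast (b : Nat) : (1 : Int) <<< b = ((1 <<< b : Nat) : Int) := by
  simp [Int.shiftLeft_eq, Nat.shiftLeft_eq]

lemma bitCount_card : ∀ (K m : Nat), m < 2 ^ K →
    PySem.Int.bitCount (m : Int) = ((List.range K).filter (fun j => m.testBit j)).length := by
  intro K
  induction K with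
  | zero =>
    intro m hm
    interval_cases m
    simp [PySem.Int.bitCount_zero]
  | succ K ih =>
    intro m hm
    by_cases h0 : m = 0
    · subst h0
      simp [PySem.Int.bitCount_zero, Nat.zero_testBit]
    · rw [PySem.Int.bitCount_natCast (Nat.pos_of_ne_zero h0)]
      rw [ih (m / 2) (by omega)]
      rw [List.range_succ_eq_map, List.filter_cons, List.filter_map]
      have hb0 : m.testBit 0 = decide (m % 2 = 1) := by
        rw [Nat.testBit_eq_decide_div_mod_eq]; simp
      have hbs : ∀ j : Nat, m.testBit (Nat.succ j) = (m / 2).testBit j := by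
        intro j; exact Nat.testBit_add_one m j
      have hcomp : ((fun j => m.testBit j) ∘ Nat.succ) = fun j => (m / 2).testBit j := by
        funext j; simp [Function.comp, hbs]
      rw [hcomp, hb0]
      have hm2 : m % 2 = 0 ∨ m % 2 = 1 := by omega
      rcases hm2 with h | h <;> simp [h] <;> omega

-- ---- bitFilter: the alive node list as a function of the alive bitmask ----
def bitFilter (alive : Nat) (order : List Int) : List Int :=
  ((List.range order.length).filter (fun j => alive.testBit j)).map (fun j => order.getD j 0)

lemma mem_bitFilter (alive : Nat) (order : List Int) (z : Int) :
    z ∈ bitFilter alive order ↔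
      ∃ j, j < order.length ∧ alive.testBit j ∧ order.getD j 0 = z := by
  simp [bitFilter, List.mem_filter, List.mem_range]
  tauto

lemma getD_inj (order : List Int) (horder : order.Nodup) (i j : Nat)
    (hi : i < order.length) (hj : j < order.length)
    (h : order.getD i 0 = order.getD j 0) : i = j := by
  rw [List.getD_eq_getElem _ _ hi, List.getD_eq_getElem _ _ hj] at h
  exact (List.Nodup.getElem_inj_iff horder).mp h

lemma bitFilter_full (order : List Int) :
    bitFilter (2 ^ order.length - 1) order = order := by
  rw [bitFilter]
  have h1 : (List.range order.length).filter (fun j => (2 ^ order.length - 1).testBit j)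
      = List.range order.length := by
    apply List.filter_eq_self.mpr
    intro j hj
    rw [Nat.testBit_two_pow_sub_one]
    simpa using List.mem_range.mp hj
  rw [h1]
  apply List.ext_getElem
  · simp
  · intro i h1' h2'
    simp only [List.getElem_map, List.getElem_range]
    exact List.getD_eq_getElem _ _ _

lemma filter_and_ne_erase :
    ∀ (l : List Nat) (p : Nat → Bool) (b : Nat), l.Nodup → p b = true →
      l.filter (fun x => p x && decide (x ≠ b)) = (l.filter p).erase b := by
  intro l
  induction l with
  | nil => intro p b _ _; simp
  | cons x l ih =>
    intro p b hnd hpb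
    obtain ⟨hx, hnd'⟩ := List.nodup_cons.mp hnd
    have ih' := ih p b hnd' hpb
    by_cases hxb : x = b
    · subst hxb
      rw [List.filter_cons, List.filter_cons, if_pos hpb]
      have hcond : (p x && decide (x ≠ x)) = false := by simp
      rw [hcond]
      simp only [Bool.false_eq_true, if_false]
      rw [List.erase_cons_head]
      apply List.filter_congr
      intro a ha
      have hax : a ≠ x := fun h => hx (h ▸ ha)
      simp [hax]
    · rw [List.filter_cons, List.filter_cons]
      by_cases hpx : p x = true
      · have hcond : (p x && decide (x ≠ b)) = true := by simp [hpx, hxb]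
        rw [hcond, if_pos hpx]
        simp only [if_true]
        rw [List.erase_cons_tail (by simp [hxb])]
        rw [ih']
      · have hcond : (p x && decide (x ≠ b)) = false := by
          simp only [Bool.not_eq_true] at hpx
          simp [hpx]
        rw [hcond]
        simp only [Bool.not_eq_true] at hpx
        rw [hpx]
        simp only [Bool.false_eq_true, if_false]
        exact ih'

lemma map_erase_lt (f : Nat → Int) (K b : Nat)
    (hinj : ∀ i j, i < K → j < K → f i = f j → i = j) (hb : b < K) :
    ∀ l : List Nat, (∀ x ∈ l, x < K) → (l.erase b).map f = (l.map f).erase (f b) := by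
  intro l
  induction l with
  | nil => simp
  | cons x l ih =>
    intro hall
    by_cases hxb : x = b
    · subst hxb
      rw [List.erase_cons_head, List.map_cons, List.erase_cons_head]
    · have hfx : f x ≠ f b := fun h =>
        hxb (hinj x b (hall x (List.mem_cons_self ..)) hb h)
      rw [List.erase_cons_tail (by simp [hxb]), List.map_cons, List.map_cons,
        List.erase_cons_tail (by simp [hfx])]
      rw [ih (fun y hy => hall y (List.mem_cons_of_mem _ hy))]

lemma bitFilter_clear (order : List Int) (horder : order.Nodup) (b : Nat)
    (hb : b < order.length) (a : Nat) (hbit : a.testBit b) :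
    bitFilter (a ^^^ 2 ^ b) order = (bitFilter a order).erase (order.getD b 0) := by
  rw [bitFilter, bitFilter]
  have hpred : (List.range order.length).filter (fun j => (a ^^^ 2 ^ b).testBit j)
      = (List.range order.length).filter (fun j => a.testBit j && decide (j ≠ b)) := by
    apply List.filter_congr
    intro j _
    rw [Nat.testBit_xor, Nat.testBit_two_pow]
    by_cases hjb : j = b
    · subst hjb; simp [hbit]
    · simp [hjb, Ne.symm hjb]
  rw [hpred, filter_and_ne_erase _ _ _ (List.nodup_range) (by simpa using hbit)]
  apply map_erase_lt _ order.length b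
    (fun i j hi hj h => getD_inj order horder i j hi hj h) hb
  intro x hx
  exact List.mem_range.mp (List.mem_filter.mp hx).1

-- ---- generic: getD after set ----
lemma getD_set_char {α : Type} (rows : List α) (i j : Nat) (x d : α) :
    (rows.set i x).getD j d = if i = j ∧ i < rows.length then x else rows.getD j d := by
  rcases Nat.lt_or_ge j rows.length with hj | hj
  · rw [List.getD_eq_getElem _ _ (by simpa using hj), List.getD_eq_getElem _ _ hj]
    rw [List.getElem_set]
    split
    · rename_i h; subst h; simp [hj]
    · rename_i h
      have : ¬ (i = j ∧ i < rows.length) := fun hc => h hc.1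
      simp [this]
  · rw [List.getD_eq_default _ _ (by simpa using hj), List.getD_eq_default _ _ hj]
    split
    · rename_i h; omega
    · rfl

-- ---- the degree array ----
lemma degInit_getD (l : List Int) (i : Nat) :
    (pvDegInit l).getD i 0 = (PySem.Int.bitCount (l.getD i 0) : Int) := by
  rw [pvDegInit]
  induction l generalizing i with
  | nil => simp [PySem.Int.bitCount_zero]
  | cons a t ih =>
    cases i with
    | zero => rfl
    | succ n => exact ih n

lemma degInit_length (l : List Int) : (pvDegInit l).length = l.length := by
  rw [pvDegInit, List.length_map]

-- ---- counting set bits against filters ----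
lemma filter_or_disjoint :
    ∀ (l : List Nat) (p q : Nat → Bool), (∀ x ∈ l, ¬(p x = true ∧ q x = true)) →
      (l.filter (fun x => p x || q x)).length = (l.filter p).length + (l.filter q).length := by
  intro l
  induction l with
  | nil => intro p q _; simp
  | cons a t ih =>
    intro p q hd
    rw [List.filter_cons, List.filter_cons, List.filter_cons]
    have ht := ih p q (fun x hx => hd x (List.mem_cons_of_mem _ hx))
    by_cases hp : p a = true
    · have hq : q a = false := by
        cases hcb : q a with
        | false => rfl
        | true => exact absurd ⟨hp, hcb⟩ (hd a (List.mem_cons_self ..))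
      rw [hp, hq]
      simp only [Bool.true_or, if_true, List.length_cons, Bool.false_eq_true, if_false]
      omega
    · have hp' : p a = false := by
        cases hcb : p a with
        | false => rfl
        | true => exact absurd hcb hp
      rw [hp']
      by_cases hq : q a = true
      · rw [hq]
        simp only [Bool.false_or, if_true, List.length_cons, Bool.false_eq_true, if_false]
        omega
      · have hq' : q a = false := by
          cases hcb : q a with
          | false => rfl
          | true => exact absurd hcb hq
        rw [hq']
        simpa using ht

lemma filter_length_erase (l : List Nat) (p : Nat → Bool) (b : Nat)
    (hnd : l.Nodup) (hb : b ∈ l) (hpb : p b = true) :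
    (l.filter (fun x => p x && decide (x ≠ b))).length = (l.filter p).length - 1 := by
  rw [filter_and_ne_erase l p b hnd hpb]
  exact List.length_erase_of_mem (List.mem_filter.mpr ⟨hb, hpb⟩)

-- the number of common set bits below K
def pvCnt (K r al : Nat) : Nat :=
  ((List.range K).filter (fun j => r.testBit j && al.testBit j)).length

lemma cnt_inter (order : List Int) (horder : order.Nodup) (adj : Int → List Int)
    (rowsF : Nat → Nat) (aliveN : Nat)
    (hA : ∀ v, (adj v).Nodup)
    (hmem : ∀ i j, i < order.length → j < order.length → aliveN.testBit i → aliveN.testBit j →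
      ((rowsF i).testBit j ↔ order.getD j 0 ∈ adj (order.getD i 0)))
    (i : Nat) (hi : i < order.length) (hbi : aliveN.testBit i) :
    pvCnt order.length (rowsF i) aliveN
      = (PySem.Set.inter (adj (order.getD i 0)) (bitFilter aliveN order)).length := by
  rw [pvCnt]
  have hperm : (((List.range order.length).filter
        (fun j => (rowsF i).testBit j && aliveN.testBit j)).map
        (fun j => order.getD j 0)).Perm
      (PySem.Set.inter (adj (order.getD i 0)) (bitFilter aliveN order)) := by
    rw [List.perm_ext_iff_of_nodup]
    · intro z
      constructor
      · intro hz
        obtain ⟨j, hj, hjz⟩ := List.mem_map.mp hz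
        have hjK := List.mem_range.mp (List.mem_filter.mp hj).1
        obtain ⟨hb1, hb2⟩ := Bool.and_eq_true_iff.mp (List.mem_filter.mp hj).2
        rw [PySem.Set.mem_inter]
        exact ⟨hjz ▸ (hmem i j hi hjK hbi hb2).mp hb1,
          (mem_bitFilter _ _ _).mpr ⟨j, hjK, hb2, hjz⟩⟩
      · intro hz
        rw [PySem.Set.mem_inter] at hz
        obtain ⟨j, hjK, hb2, hjz⟩ := (mem_bitFilter _ _ _).mp hz.2
        apply List.mem_map.mpr
        refine ⟨j, List.mem_filter.mpr ⟨List.mem_range.mpr hjK, ?_⟩, hjz⟩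
        have hb1 : (rowsF i).testBit j := (hmem i j hi hjK hbi hb2).mpr (hjz ▸ hz.1)
        rw [hb1, hb2]
        rfl
    · apply List.Nodup.map_on
      · intro a ha b hb h
        exact getD_inj order horder a b (List.mem_range.mp (List.mem_filter.mp ha).1)
          (List.mem_range.mp (List.mem_filter.mp hb).1) h
      · exact (List.nodup_range).filter _
    · exact PySem.Set.nodup_inter _ _ (hA _)
  have := hperm.length_eq
  simpa using this

-- ---- the first-minimum fold behind min(alive_list, key=…) ----
def pvMinStep (key : Nat → Int) (acc : Option Nat) (x : Nat) : Option Nat :=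
  match acc with
  | none => some x
  | some m => if key x < key m then some x else some m

lemma min?_eq_foldl (l : List Nat) (key : Nat → Int) :
    PySem.List.min? l key = l.foldl (pvMinStep key) none := by
  rw [PySem.List.min?]
  congr 1
  funext acc x
  cases acc <;> rfl

lemma minFold_mem (key : Nat → Int) :
    ∀ (l : List Nat) (s : Option Nat) (b : Nat),
      l.foldl (pvMinStep key) s = some b → b ∈ l ∨ s = some b := by
  intro l
  induction l with
  | nil => intro s b h; exact Or.inr h
  | cons a t ih =>
    intro s b h
    rw [List.foldl_cons] at h
    rcases ih _ b h with h' | h'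
    · exact Or.inl (List.mem_cons_of_mem _ h')
    · match s with
      | none =>
        rw [show pvMinStep key none a = some a from rfl] at h'
        cases h'
        exact Or.inl (List.mem_cons_self ..)
      | some m =>
        rw [show pvMinStep key (some m) a
          = if key a < key m then some a else some m from rfl] at h'
        split at h'
        · cases h'; exact Or.inl (List.mem_cons_self ..)
        · exact Or.inr h'

lemma minFold_isSome (key : Nat → Int) :
    ∀ (l : List Nat) (s : Option Nat), s.isSome →
      (l.foldl (pvMinStep key) s).isSome := by
  intro l
  induction l with
  | nil => intro s h; exact h
  | cons a t ih =>
    intro s h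
    rw [List.foldl_cons]
    apply ih
    match s with
    | none => rfl
    | some m =>
      rw [show pvMinStep key (some m) a
        = if key a < key m then some a else some m from rfl]
      split <;> rfl

-- A's min-degree scan over the alive node list IS B's first-minimum of the degree array
lemma scan_min_eq (order : List Int) (degA : Int → Nat) (key : Nat → Int) :
    ∀ (l : List Nat) (sB : Option Nat),
      (∀ i ∈ l, key i = ((degA (order.getD i 0) : Nat) : Int)) →
      (∀ b, sB = some b → key b = ((degA (order.getD b 0) : Nat) : Int)) →
      (l.map (fun j => order.getD j 0)).foldl
          (fun s v =>
            match s with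
            | none => some (degA v, v)
            | some (d, mn) => if degA v < d then some (degA v, v) else some (d, mn))
          (sB.map (fun b => (degA (order.getD b 0), order.getD b 0)))
        = Option.map (fun b => (degA (order.getD b 0), order.getD b 0))
            (l.foldl (pvMinStep key) sB) := by
  intro l
  induction l with
  | nil => intro sB _ _; rfl
  | cons i t ih =>
    intro sB hl hs
    have hl' : ∀ j ∈ t, key j = ((degA (order.getD j 0) : Nat) : Int) :=
      fun j hj => hl j (List.mem_cons_of_mem _ hj)
    have hki := hl i (List.mem_cons_self ..)
    cases sB with
    | none =>
      rw [List.map_cons, List.foldl_cons, List.foldl_cons]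
      exact ih (some i) hl' (fun b hb => by
        have hbi := Option.some.inj hb
        subst hbi
        exact hki)
    | some m =>
      have hkm := hs m rfl
      rw [List.map_cons, List.foldl_cons, List.foldl_cons]
      simp only [Option.map_some]
      rw [show pvMinStep key (some m) i
        = if key i < key m then some i else some m from rfl]
      by_cases hlt : degA (order.getD i 0) < degA (order.getD m 0)
      · rw [if_pos hlt, if_pos (by rw [hki, hkm]; exact_mod_cast hlt)]
        exact ih (some i) hl' (fun b hb => by
          have hbi := Option.some.inj hb
          subst hbi
          exact hki)
      · rw [if_neg hlt, if_neg (by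
          rw [hki, hkm]
          exact fun hc => hlt (by exact_mod_cast hc))]
        exact ih (some m) hl' (fun b hb => by
          have hbi := Option.some.inj hb
          subst hbi
          exact hkm)

-- ---- the inner clique loop: processes exactly the set bits of rem, once each ----
lemma elimInner_spec (K : Nat) :
    ∀ (fuel : Nat) (SN remN : Nat) (adjm deg : List Int) (rowsF : Nat → Nat),
      adjm.length = K → deg.length = K → remN < 2 ^ K →
      ((List.range K).filter (remN.testBit)).length ≤ fuel →
      (∀ i, adjm.getD i 0 = ((rowsF i : Nat) : Int)) →
      (pvElimInner fuel ((SN : Nat) : Int) ((remN : Nat) : Int) adjm deg).1.length = K ∧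
      (pvElimInner fuel ((SN : Nat) : Int) ((remN : Nat) : Int) adjm deg).2.length = K ∧
      (∀ u, (pvElimInner fuel ((SN : Nat) : Int) ((remN : Nat) : Int) adjm deg).1.getD u 0
        = ((if remN.testBit u then rowsF u ||| (SN ^^^ (SN &&& (rowsF u ||| 1 <<< u)))
            else rowsF u : Nat) : Int)) ∧
      (∀ u, (pvElimInner fuel ((SN : Nat) : Int) ((remN : Nat) : Int) adjm deg).2.getD u 0
        = (if remN.testBit u then
            deg.getD u 0 + (PySem.Int.bitCount (((SN ^^^ (SN &&& (rowsF u ||| 1 <<< u))) : Nat) : Int) : Int) - 1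
          else deg.getD u 0)) := by
  intro fuel
  induction fuel with
  | zero =>
    intro SN remN adjm deg rowsF hlenA hlenD hremlt hcount hrow
    have hlen0 : ((List.range K).filter (remN.testBit)).length = 0 := by omega
    have hnil : (List.range K).filter (remN.testBit) = [] :=
      List.eq_nil_of_length_eq_zero hlen0
    have hrem0 : remN = 0 := by
      apply Nat.eq_of_testBit_eq
      intro j
      rw [Nat.zero_testBit]
      by_cases hj : j < K
      · have := List.filter_eq_nil_iff.mp hnil j (List.mem_range.mpr hj)
        simpa using this
      · exact Nat.testBit_lt_two_pow
          (lt_of_lt_of_le hremlt (Nat.pow_le_pow_right (by norm_num) (by omega)))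
    subst hrem0
    refine ⟨hlenA, hlenD, ?_, ?_⟩
    · intro u
      simp only [pvElimInner, Nat.zero_testBit, Bool.false_eq_true, if_false]
      exact hrow u
    · intro u
      simp only [pvElimInner, Nat.zero_testBit, Bool.false_eq_true, if_false]
  | succ f ih =>
    intro SN remN adjm deg rowsF hlenA hlenD hremlt hcount hrow
    by_cases hrem0 : remN = 0
    · subst hrem0
      rw [pvElimInner]
      rw [if_neg (by simp)]
      refine ⟨hlenA, hlenD, ?_, ?_⟩
      · intro u
        simp only [Nat.zero_testBit, Bool.false_eq_true, if_false]
        exact hrow u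
      · intro u
        simp only [Nat.zero_testBit, Bool.false_eq_true, if_false]
    · -- the top set bit of remN
      have hne : ((remN : Nat) : Int) ≠ 0 := by exact_mod_cast hrem0
      rw [pvElimInner, if_pos hne]
      simp only
      have h1 : 2 ^ (PySem.Int.bitLength ((remN : Nat) : Int) - 1) ≤ remN := by
        have := PySem.Int.two_pow_bitLength_le ((remN : Nat) : Int) hne
        simpa using this
      have h2 : remN < 2 ^ PySem.Int.bitLength ((remN : Nat) : Int) := by
        have := PySem.Int.lt_two_pow_bitLength ((remN : Nat) : Int)
        simpa using this
      set top := PySem.Int.bitLength ((remN : Nat) : Int) - 1 with htopdef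
      have hL1 : 1 ≤ PySem.Int.bitLength ((remN : Nat) : Int) := by
        by_contra h
        push_neg at h
        have h0 : PySem.Int.bitLength ((remN : Nat) : Int) = 0 := by omega
        rw [h0] at h2
        omega
      have htoplt : remN < 2 ^ (top + 1) := by
        have heq : top + 1 = PySem.Int.bitLength ((remN : Nat) : Int) := by omega
        rw [heq]
        exact h2
      have htopbit : remN.testBit top = true := by
        rw [Nat.testBit_eq_decide_div_mod_eq]
        have hdiv : remN / 2 ^ top = 1 := by
          apply Nat.div_eq_of_lt_le
          · simpa using h1
          · have h2t : (1 + 1) * 2 ^ top = 2 ^ (top + 1) := by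
              rw [pow_succ]; ring
            omega
        simp [hdiv]
      have htopK : top < K := by
        by_contra h
        push_neg at h
        have : (2:Nat) ^ K ≤ 2 ^ top := Nat.pow_le_pow_right (by norm_num) h
        omega
      -- the step's values, in Nat form
      have haddcast : PySem.Int.bxor ((SN : Nat) : Int)
          (PySem.Int.band ((SN : Nat) : Int)
            (PySem.Int.bor (adjm.getD top 0) ((1:Int) <<< top)))
          = (((SN ^^^ (SN &&& (rowsF top ||| 1 <<< top))) : Nat) : Int) := by
        rw [hrow top, shift1_cast, PySem.Int.bor_natCast, PySem.Int.band_natCast,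
          PySem.Int.bxor_natCast]
      have hremcast : PySem.Int.bxor ((remN : Nat) : Int) ((1:Int) <<< top)
          = (((remN ^^^ 1 <<< top) : Nat) : Int) := by
        rw [shift1_cast, PySem.Int.bxor_natCast]
      rw [haddcast, hremcast]
      -- bits of the reduced rem
      have hrem'bit : ∀ j, (remN ^^^ 1 <<< top).testBit j
          = (remN.testBit j && decide (j ≠ top)) := by
        intro j
        rw [Nat.one_shiftLeft, Nat.testBit_xor, Nat.testBit_two_pow]
        by_cases hj : j = top
        · subst hj; simp [htopbit]
        · simp [hj, Ne.symm hj]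
      have hrem'lt : remN ^^^ 1 <<< top < 2 ^ K := by
        rw [Nat.one_shiftLeft]
        exact Nat.xor_lt_two_pow hremlt (Nat.pow_lt_pow_right (by norm_num) htopK)
      have hfilter : (List.range K).filter ((remN ^^^ 1 <<< top).testBit)
          = ((List.range K).filter (remN.testBit)).erase top := by
        rw [List.filter_congr (fun j _ => hrem'bit j)]
        exact filter_and_ne_erase _ _ _ (List.nodup_range) htopbit
      have hcount' : ((List.range K).filter ((remN ^^^ 1 <<< top).testBit)).length ≤ f := by
        rw [hfilter]
        have hmem : top ∈ (List.range K).filter (remN.testBit) :=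
          List.mem_filter.mpr ⟨List.mem_range.mpr htopK, htopbit⟩
        have := List.length_erase_of_mem hmem
        have hpos : 1 ≤ ((List.range K).filter (remN.testBit)).length := by
          have := List.length_pos_of_mem hmem
          omega
        omega
      -- the updated state, described by a new row function
      have hrow' : ∀ i, (adjm.set top (PySem.Int.bor (adjm.getD top 0)
            (((SN ^^^ (SN &&& (rowsF top ||| 1 <<< top))) : Nat) : Int))).getD i 0
          = (((fun v => if v = top then rowsF top ||| (SN ^^^ (SN &&& (rowsF top ||| 1 <<< top)))
              else rowsF v) i : Nat) : Int) := by
        intro i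
        rw [getD_set_char]
        by_cases hi : i = top
        · subst hi
          rw [if_pos ⟨rfl, by omega⟩, hrow top, PySem.Int.bor_natCast]
          simp
        · rw [if_neg (fun hc => hi hc.1.symm), hrow i]
          simp [hi]
      have ih' := ih SN (remN ^^^ 1 <<< top)
        (adjm.set top (PySem.Int.bor (adjm.getD top 0)
          (((SN ^^^ (SN &&& (rowsF top ||| 1 <<< top))) : Nat) : Int)))
        (deg.set top (deg.getD top 0 +
          (PySem.Int.bitCount (((SN ^^^ (SN &&& (rowsF top ||| 1 <<< top))) : Nat) : Int) : Int) - 1))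
        (fun v => if v = top then rowsF top ||| (SN ^^^ (SN &&& (rowsF top ||| 1 <<< top)))
          else rowsF v)
        (by rw [List.length_set]; exact hlenA)
        (by rw [List.length_set]; exact hlenD)
        hrem'lt hcount' hrow'
      obtain ⟨ihl1, ihl2, ihr, ihd⟩ := ih'
      refine ⟨ihl1, ihl2, ?_, ?_⟩
      · intro u
        rw [ihr u, hrem'bit u]
        by_cases hu : u = top
        · subst hu
          simp [htopbit]
        · simp [hu]
      · intro u
        rw [ihd u, hrem'bit u]
        by_cases hu : u = top
        · subst hu
          have hc : (remN.testBit top && decide (top ≠ top)) = false := by simp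
          rw [hc]
          simp only [Bool.false_eq_true, if_false]
          have hset : (deg.set top (deg.getD top 0 +
              (PySem.Int.bitCount (((SN ^^^ (SN &&& (rowsF top ||| 1 <<< top))) : Nat) : Int) : Int) - 1)).getD top 0
              = deg.getD top 0 +
                (PySem.Int.bitCount (((SN ^^^ (SN &&& (rowsF top ||| 1 <<< top))) : Nat) : Int) : Int) - 1 := by
            rw [getD_set_char, if_pos ⟨rfl, by omega⟩]
          rw [hset, if_pos htopbit]
        · have hdec2 : (remN.testBit u && decide (u ≠ top)) = remN.testBit u := by
            simp [hu]
          rw [hdec2]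
          have hset : (deg.set top (deg.getD top 0 +
              (PySem.Int.bitCount (((SN ^^^ (SN &&& (rowsF top ||| 1 <<< top))) : Nat) : Int) : Int) - 1)).getD u 0
              = deg.getD u 0 := by
            rw [getD_set_char, if_neg (fun hc => hu hc.1.symm)]
          rw [hset]
          simp [hu]

-- bits of the fill mask S ^ (S & (r | 1 <<< u)) and of the updated row
lemma add_testBit (S r : Nat) (u j : Nat) :
    (S ^^^ (S &&& (r ||| 1 <<< u))).testBit j
      = (S.testBit j && (!r.testBit j && !decide (u = j))) := by
  rw [Nat.testBit_xor, Nat.testBit_land, Nat.testBit_lor, Nat.one_shiftLeft,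
    Nat.testBit_two_pow]
  cases hS : S.testBit j <;> cases hr : r.testBit j <;> cases hd : decide (u = j) <;> decide

lemma clique_testBit (S r : Nat) (u j : Nat) :
    ((if S.testBit u then r ||| (S ^^^ (S &&& (r ||| 1 <<< u))) else r).testBit j)
      ↔ (r.testBit j ∨ (S.testBit u = true ∧ S.testBit j = true ∧ u ≠ j)) := by
  by_cases hSu : S.testBit u = true
  · rw [if_pos hSu, Nat.testBit_lor, add_testBit]
    by_cases huj : u = j
    · subst huj
      cases hr : r.testBit u <;> simp [hr, hSu]
    · have hd : (decide (u = j)) = false := by simp [huj]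
      rw [hd]
      cases hr : r.testBit j <;> cases hS : S.testBit j <;> simp [hr, hS, hSu, huj]
  · rw [if_neg hSu]
    simp [hSu]

-- ---- the two elimination loops agree ----
lemma elim_eq (order : List Int) (horder : order.Nodup) :
    ∀ (fuel : Nat) (adj : Int → List Int) (adjm deg : List Int) (rowsF : Nat → Nat)
      (aliveN : Nat) (aliveL : List Nat) (tw : Int),
      adjm.length = order.length → deg.length = order.length →
      aliveN < 2 ^ order.length →
      aliveL = (List.range order.length).filter (aliveN.testBit) →
      (∀ i, adjm.getD i 0 = ((rowsF i : Nat) : Int)) →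
      (∀ i, i < order.length → rowsF i < 2 ^ order.length) →
      (∀ v, (adj v).Nodup) →
      (∀ x w, w ∈ adj x ↔ x ∈ adj w) →
      (∀ i j, i < order.length → j < order.length → aliveN.testBit i → aliveN.testBit j →
        ((rowsF i).testBit j ↔ order.getD j 0 ∈ adj (order.getD i 0))) →
      (∀ i ∈ aliveL, deg.getD i 0 =
        ((PySem.Set.inter (adj (order.getD i 0)) (bitFilter aliveN order)).length : Int)) →
      pvElimAGo fuel adj (bitFilter aliveN order) tw
        = pvElimGo fuel order.length adjm deg ((aliveN : Nat) : Int) aliveL tw := by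
  intro fuel
  induction fuel with
  | zero => intros; rfl
  | succ f ih =>
    intro adj adjm deg rowsF aliveN aliveL tw hlenA hlenD halive haL hrow hbound hA hsym hmem hdeg
    cases hLc : aliveL with
    | nil =>
      subst hLc
      rw [pvElimAGo, pvElimGo]
      have hns : bitFilter aliveN order = [] := by
        rw [bitFilter, ← haL]
        rfl
      rw [hns]
      simp [pvScanMin]
    | cons a0 rest =>
      subst hLc
      rw [pvElimAGo, pvElimGo]
      have hnsmap : bitFilter aliveN order = (a0 :: rest).map (fun j => order.getD j 0) := by
        rw [bitFilter, ← haL]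
      have hkeys : ∀ i ∈ (a0 :: rest), (fun i => deg.getD i 0) i =
          (((fun v => (PySem.Set.inter (adj v) (bitFilter aliveN order)).length)
            (order.getD i 0) : Nat) : Int) := by
        intro i hi
        exact hdeg i hi
      have hscan := scan_min_eq order
        (fun v => (PySem.Set.inter (adj v) (bitFilter aliveN order)).length)
        (fun i => deg.getD i 0) (a0 :: rest) none hkeys (by intro b hb; cases hb)
      have hsome : ((a0 :: rest).foldl (pvMinStep (fun i => deg.getD i 0)) none).isSome := by
        rw [List.foldl_cons]
        exact minFold_isSome _ rest (some a0) rfl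
      obtain ⟨best, hbest⟩ := Option.isSome_iff_exists.mp hsome
      have hbmem : best ∈ (a0 :: rest) := by
        rcases minFold_mem _ (a0 :: rest) none best hbest with h | h
        · exact h
        · cases h
      have hbK : best < order.length := List.mem_range.mp (List.mem_filter.mp (haL ▸ hbmem)).1
      have hbbit : aliveN.testBit best = true := (List.mem_filter.mp (haL ▸ hbmem)).2
      have hAscan : pvScanMin
          (fun v => (PySem.Set.inter (adj v) (bitFilter aliveN order)).length)
          (bitFilter aliveN order)
          = some ((PySem.Set.inter (adj (order.getD best 0)) (bitFilter aliveN order)).length,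
              order.getD best 0) := by
        rw [pvScanMin, hnsmap]
        have h2 := hscan
        rw [hbest] at h2
        rw [hnsmap] at h2
        exact h2
      have hminD : PySem.List.minD (a0 :: rest) (fun i => deg.getD i 0) 0 = best := by
        rw [PySem.List.minD, min?_eq_foldl, hbest]
        rfl
      rw [hAscan]
      simp only [hminD]
      -- abbreviations
      set m := order.getD best 0 with hm
      set ns := bitFilter aliveN order with hns
      set neighbors := PySem.Set.inter (adj m) ns with hneighbors
      have hbd : deg.getD best 0 = ((neighbors.length : Nat) : Int) := hdeg best hbmem
      have htw : max tw ((neighbors.length : Nat) : Int)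
          = if deg.getD best 0 > tw then deg.getD best 0 else tw := by
        rw [hbd]
        by_cases h : (((neighbors.length : Nat) : Int)) > tw
        · rw [if_pos h, max_eq_right (le_of_lt h)]
        · rw [if_neg h, max_eq_left (by omega)]
      -- the eliminated bit
      set aliveN' := aliveN ^^^ 2 ^ best with haliveN'
      have halive'cast : PySem.Int.bxor ((aliveN : Nat) : Int) ((1:Int) <<< best)
          = ((aliveN' : Nat) : Int) := by
        rw [shift1_cast, PySem.Int.bxor_natCast, haliveN', Nat.shiftLeft_eq, one_mul]
      have halive'lt : aliveN' < 2 ^ order.length :=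
        Nat.xor_lt_two_pow halive (Nat.pow_lt_pow_right (by norm_num) hbK)
      have halive'bit : ∀ t, aliveN'.testBit t = (aliveN.testBit t && decide (t ≠ best)) := by
        intro t
        rw [haliveN', Nat.testBit_xor, Nat.testBit_two_pow]
        by_cases htb : t = best
        · subst htb; simp [hbbit]
        · simp [htb, Ne.symm htb]
      have herase : bitFilter aliveN' order = ns.erase m := by
        rw [haliveN', hns, hm]
        exact bitFilter_clear order horder best hbK aliveN hbbit
      -- the neighborhood mask
      set SN := rowsF best &&& aliveN' with hSN
      have hScast : PySem.Int.band (adjm.getD best 0) ((aliveN' : Nat) : Int)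
          = ((SN : Nat) : Int) := by
        rw [hrow best, PySem.Int.band_natCast]
      have hSNlt : SN < 2 ^ order.length := Nat.lt_of_le_of_lt Nat.and_le_right halive'lt
      have hSsub : ∀ j, SN.testBit j = true → aliveN'.testBit j = true := by
        intro j h
        rw [hSN, Nat.testBit_land] at h
        exact (Bool.and_eq_true_iff.mp h).2
      have hneighbit : ∀ t, t < order.length → aliveN'.testBit t →
          (SN.testBit t ↔ order.getD t 0 ∈ neighbors) := by
        intro t htK hbt
        have hat : aliveN.testBit t := by
          have := hbt; rw [halive'bit] at this
          exact (Bool.and_eq_true_iff.mp this).1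
        rw [hSN, Nat.testBit_land]
        constructor
        · intro h
          obtain ⟨h1, _⟩ := Bool.and_eq_true_iff.mp h
          rw [hneighbors, PySem.Set.mem_inter]
          refine ⟨(hmem best t hbK htK hbbit hat).mp h1, ?_⟩
          rw [hns, mem_bitFilter]
          exact ⟨t, htK, hat, rfl⟩
        · intro h
          rw [hneighbors, PySem.Set.mem_inter] at h
          have h1 := (hmem best t hbK htK hbbit hat).mpr h.1
          rw [h1, hbt]
          rfl
      -- symmetric bit fact used twice below
      have hrowsym : ∀ i, i < order.length → aliveN.testBit i →
          ((rowsF i).testBit best ↔ (rowsF best).testBit i) := by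
        intro i hiK hai
        rw [hmem i best hiK hbK hai hbbit, hmem best i hbK hiK hbbit hai]
        exact hsym _ _ |>.symm
      -- the inner loop
      have hspec := elimInner_spec order.length order.length SN SN adjm deg rowsF
        hlenA hlenD hSNlt
        (by
          have := List.length_filter_le (SN.testBit) (List.range order.length)
          simpa using this)
        hrow
      obtain ⟨hRl1, hRl2, hRrow, hRdeg⟩ := hspec
      -- bit characterisation of the updated rows
      have hbit' : ∀ u j, ((if SN.testBit u then rowsF u ||| (SN ^^^ (SN &&& (rowsF u ||| 1 <<< u)))
            else rowsF u).testBit j)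
          ↔ ((rowsF u).testBit j ∨ (SN.testBit u = true ∧ SN.testBit j = true ∧ u ≠ j)) :=
        fun u j => clique_testBit SN (rowsF u) u j
      -- the A-side cliqued adjacency
      set adj' := neighbors.foldl (fun a u =>
          neighbors.foldl (fun a w =>
            if u ≠ w then
              let a1 := updF a u (PySem.Set.add (a u) w)
              updF a1 w (PySem.Set.add (a1 w) u)
            else a) a) adj with hadj'
      have hA' : ∀ v, (adj' v).Nodup := nodupOuterFold neighbors neighbors adj hA
      have hsym' : ∀ x w, w ∈ adj' x ↔ x ∈ adj' w := by
        intro x w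
        rw [hadj', memOuterFold, memOuterFold]
        constructor
        · rintro (h | ⟨h1, h2, h3⟩)
          · exact Or.inl ((hsym x w).mp h)
          · exact Or.inr ⟨h2, h1, Ne.symm h3⟩
        · rintro (h | ⟨h1, h2, h3⟩)
          · exact Or.inl ((hsym x w).mpr h)
          · exact Or.inr ⟨h2, h1, Ne.symm h3⟩
      have hmem' : ∀ i j, i < order.length → j < order.length →
          aliveN'.testBit i → aliveN'.testBit j →
          (((fun u => if SN.testBit u then rowsF u ||| (SN ^^^ (SN &&& (rowsF u ||| 1 <<< u)))
              else rowsF u) i).testBit j ↔ order.getD j 0 ∈ adj' (order.getD i 0)) := by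
        intro i j hiK hjK hbi hbj
        have hai : aliveN.testBit i := by
          have := hbi; rw [halive'bit] at this
          exact (Bool.and_eq_true_iff.mp this).1
        have haj : aliveN.testBit j := by
          have := hbj; rw [halive'bit] at this
          exact (Bool.and_eq_true_iff.mp this).1
        have hold := hmem i j hiK hjK hai haj
        have hadjmem : order.getD j 0 ∈ adj' (order.getD i 0) ↔
            order.getD j 0 ∈ adj (order.getD i 0) ∨
              (order.getD i 0 ∈ neighbors ∧ order.getD j 0 ∈ neighbors ∧
                order.getD i 0 ≠ order.getD j 0) := by
          rw [hadj', memOuterFold]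
        have hneq : order.getD i 0 ≠ order.getD j 0 ↔ i ≠ j := by
          constructor
          · intro h hc; exact h (hc ▸ rfl)
          · intro h hc; exact h (getD_inj order horder i j hiK hjK hc)
        rw [hbit' i j, hadjmem]
        constructor
        · rintro (h | ⟨hSu, hSj, hne⟩)
          · exact Or.inl (hold.mp h)
          · exact Or.inr ⟨(hneighbit i hiK hbi).mp hSu, (hneighbit j hjK hbj).mp hSj,
              hneq.mpr hne⟩
        · rintro (h | ⟨hiN, hjN, hne⟩)
          · exact Or.inl (hold.mpr h)
          · exact Or.inr ⟨(hneighbit i hiK hbi).mpr hiN, (hneighbit j hjK hbj).mpr hjN,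
              hneq.mp hne⟩
      have hbound' : ∀ i, i < order.length →
          (if SN.testBit i then rowsF i ||| (SN ^^^ (SN &&& (rowsF i ||| 1 <<< i)))
            else rowsF i) < 2 ^ order.length := by
        intro i hiK
        by_cases hSi : SN.testBit i = true
        · rw [if_pos hSi]
          exact Nat.or_lt_two_pow (hbound i hiK)
            (Nat.xor_lt_two_pow hSNlt (Nat.lt_of_le_of_lt Nat.and_le_left hSNlt))
        · rw [if_neg hSi]
          exact hbound i hiK
      -- the alive list after removal
      have haL' : (PySem.List.remove? (a0 :: rest) best).getD (a0 :: rest)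
          = (List.range order.length).filter (aliveN'.testBit) := by
        rw [PySem.List.remove?_eq_some_erase _ best hbmem, Option.getD_some]
        have h1 : (List.range order.length).filter (aliveN'.testBit)
            = ((List.range order.length).filter (aliveN.testBit)).erase best := by
          rw [List.filter_congr (fun j _ => halive'bit j)]
          exact filter_and_ne_erase _ _ _ (List.nodup_range) hbbit
        rw [h1, ← haL]
      -- the degree array stays correct
      have hdeg' : ∀ i ∈ (List.range order.length).filter (aliveN'.testBit),
          (pvElimInner order.length ((SN : Nat) : Int) ((SN : Nat) : Int) adjm deg).2.getD i 0 =
          ((PySem.Set.inter (adj' (order.getD i 0)) (bitFilter aliveN' order)).length : Int) := by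
        intro i hi
        have hiK : i < order.length := List.mem_range.mp (List.mem_filter.mp hi).1
        have hbi : aliveN'.testBit i = true := (List.mem_filter.mp hi).2
        have hai : aliveN.testBit i := by
          have := hbi; rw [halive'bit] at this
          exact (Bool.and_eq_true_iff.mp this).1
        have hibest : i ≠ best := by
          have := hbi; rw [halive'bit] at this
          simpa using (Bool.and_eq_true_iff.mp this).2
        have himem : i ∈ (a0 :: rest) := by
          rw [haL]
          exact List.mem_filter.mpr ⟨List.mem_range.mpr hiK, hai⟩
        have hnew := cnt_inter order horder adj'
          (fun u => if SN.testBit u then rowsF u ||| (SN ^^^ (SN &&& (rowsF u ||| 1 <<< u)))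
            else rowsF u) aliveN' hA' hmem' i hiK hbi
        have hold := cnt_inter order horder adj rowsF aliveN hA hmem i hiK hai
        rw [← hnew]
        rw [hRdeg i]
        by_cases hSi : SN.testBit i = true
        · -- i is a neighbor of the eliminated node
          rw [if_pos hSi]
          have hdi : deg.getD i 0 = ((pvCnt order.length (rowsF i) aliveN : Nat) : Int) := by
            rw [hdeg i himem, ← hold]
          -- bits of the added mask
          have haddbit : ∀ j, (SN ^^^ (SN &&& (rowsF i ||| 1 <<< i))).testBit j
              = (SN.testBit j && (!(rowsF i).testBit j && !decide (i = j))) :=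
            fun j => add_testBit SN (rowsF i) i j
          have haddlt : SN ^^^ (SN &&& (rowsF i ||| 1 <<< i)) < 2 ^ order.length :=
            Nat.xor_lt_two_pow hSNlt (Nat.lt_of_le_of_lt Nat.and_le_left hSNlt)
          have hbc : PySem.Int.bitCount (((SN ^^^ (SN &&& (rowsF i ||| 1 <<< i))) : Nat) : Int)
              = ((List.range order.length).filter
                  ((SN ^^^ (SN &&& (rowsF i ||| 1 <<< i))).testBit)).length :=
            bitCount_card order.length _ haddlt
          -- rowsF i has the bit of the eliminated node
          have hrbest : (rowsF i).testBit best = true := by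
            rw [hrowsym i hiK hai]
            have := hSi
            rw [hSN, Nat.testBit_land] at this
            exact (Bool.and_eq_true_iff.mp this).1
          have hpoldbest : ((rowsF i).testBit best && aliveN.testBit best) = true := by
            rw [hrbest, hbbit]
            rfl
          -- pointwise predicate split
          have hsplit : ∀ j, ((if SN.testBit i then
                rowsF i ||| (SN ^^^ (SN &&& (rowsF i ||| 1 <<< i))) else rowsF i).testBit j
                && aliveN'.testBit j)
              = ((((rowsF i).testBit j && aliveN.testBit j) && decide (j ≠ best))
                  || (SN ^^^ (SN &&& (rowsF i ||| 1 <<< i))).testBit j) := by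
            intro j
            rw [if_pos hSi, Nat.testBit_lor, halive'bit j]
            by_cases hadd : (SN ^^^ (SN &&& (rowsF i ||| 1 <<< i))).testBit j = true
            · have hSj : SN.testBit j = true := by
                have hq := hadd
                rw [haddbit j] at hq
                exact (Bool.and_eq_true_iff.mp hq).1
              have ha'j := hSsub j hSj
              have hcc := ha'j
              rw [halive'bit j] at hcc
              obtain ⟨hc1, hc2⟩ := Bool.and_eq_true_iff.mp hcc
              rw [hadd, hc1, hc2]
              simp
            · have hadd' : (SN ^^^ (SN &&& (rowsF i ||| 1 <<< i))).testBit j = false := by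
                cases hcb : (SN ^^^ (SN &&& (rowsF i ||| 1 <<< i))).testBit j with
                | false => rfl
                | true => exact absurd hcb hadd
              rw [hadd']
              cases hr : (rowsF i).testBit j <;> cases ha : aliveN.testBit j <;> simp [hr, ha]
          -- count the new common bits
          have hcnt : pvCnt order.length (if SN.testBit i then
                rowsF i ||| (SN ^^^ (SN &&& (rowsF i ||| 1 <<< i))) else rowsF i) aliveN'
              = (pvCnt order.length (rowsF i) aliveN - 1)
                + ((List.range order.length).filter
                    ((SN ^^^ (SN &&& (rowsF i ||| 1 <<< i))).testBit)).length := by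
            rw [pvCnt, List.filter_congr (fun j _ => hsplit j)]
            rw [filter_or_disjoint _ _ _ (by
              intro j _ hc
              obtain ⟨h1, h2⟩ := hc
              have hr := (Bool.and_eq_true_iff.mp (Bool.and_eq_true_iff.mp h1).1).1
              have := h2
              rw [haddbit] at this
              obtain ⟨_, h3⟩ := Bool.and_eq_true_iff.mp this
              obtain ⟨h4, _⟩ := Bool.and_eq_true_iff.mp h3
              rw [hr] at h4
              cases h4)]
            have he : ((List.range order.length).filter (fun j =>
                ((rowsF i).testBit j && aliveN.testBit j) && decide (j ≠ best))).length
                = pvCnt order.length (rowsF i) aliveN - 1 := by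
              rw [pvCnt]
              exact filter_length_erase _ _ best (List.nodup_range)
                (List.mem_range.mpr hbK) hpoldbest
            rw [he]
          have hcpos : 1 ≤ pvCnt order.length (rowsF i) aliveN := by
            have : best ∈ (List.range order.length).filter
                (fun j => (rowsF i).testBit j && aliveN.testBit j) :=
              List.mem_filter.mpr ⟨List.mem_range.mpr hbK, hpoldbest⟩
            have := List.length_pos_of_mem this
            rw [pvCnt]
            omega
          rw [hcnt, hdi, hbc]
          push_cast
          omega
        · -- i keeps its degree
          rw [if_neg hSi]
          rw [hdeg i himem, ← hold]
          -- the two counts are equal bit for bit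
          have hrbest : (rowsF i).testBit best = false := by
            have hSfalse : (rowsF best).testBit i = false := by
              cases hcb : (rowsF best).testBit i with
              | false => rfl
              | true =>
                exfalso
                apply hSi
                rw [hSN, Nat.testBit_land, hcb, hbi]
                rfl
            cases hcb2 : (rowsF i).testBit best with
            | false => rfl
            | true =>
              exfalso
              have hx := (hrowsym i hiK hai).mp hcb2
              rw [hSfalse] at hx
              cases hx
          have hcong : ∀ j ∈ List.range order.length,
              ((if SN.testBit i then rowsF i ||| (SN ^^^ (SN &&& (rowsF i ||| 1 <<< i)))
                else rowsF i).testBit j && aliveN'.testBit j)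
              = ((rowsF i).testBit j && aliveN.testBit j) := by
            intro j _
            rw [if_neg hSi, halive'bit j]
            by_cases hjb : j = best
            · subst hjb
              rw [hrbest]
              simp
            · have : (decide (j ≠ best)) = true := by simp [hjb]
              rw [this, Bool.and_true]
          rw [pvCnt, pvCnt, List.filter_congr hcong]
      -- assemble the recursive call
      rw [htw, halive'cast, hScast, haL']
      have hrec := ih adj'
        (pvElimInner order.length ((SN : Nat) : Int) ((SN : Nat) : Int) adjm deg).1
        (pvElimInner order.length ((SN : Nat) : Int) ((SN : Nat) : Int) adjm deg).2
        (fun u => if SN.testBit u then rowsF u ||| (SN ^^^ (SN &&& (rowsF u ||| 1 <<< u)))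
          else rowsF u)
        aliveN' ((List.range order.length).filter (aliveN'.testBit))
        (if deg.getD best 0 > tw then deg.getD best 0 else tw)
        hRl1 hRl2 halive'lt rfl hRrow hbound' hA' hsym' hmem' hdeg'
      rw [herase] at hrec
      exact hrec

-- ---- the graph-building folds agree ----
def pvEdgeBitN (order : List Int) (rows : List Nat) (x : Int) (o : Nat) : List Nat :=
  if x ∈ order then
    let r1 := rows.set (order.idxOf x) (rows.getD (order.idxOf x) 0 ||| 1 <<< o)
    r1.set o (r1.getD o 0 ||| 1 <<< (order.idxOf x))
  else rows

lemma edgeBit_cast (order : List Int) (l : List Nat) (x : Int) (o : Nat) :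
    pvEdgeBit order (l.map (fun (m : Nat) => (m : Int))) x o
      = (pvEdgeBitN order l x o).map (fun (m : Nat) => (m : Int)) := by
  rw [pvEdgeBit, pvEdgeBitN]
  split
  · rw [pvRowOr, pvRowOr]
    rw [getD_castRows, shift1_cast, PySem.Int.bor_natCast]
    have hset1 : (List.map (fun (m : Nat) => (m : Int)) l).set (order.idxOf x)
          (((l.getD (order.idxOf x) 0 ||| 1 <<< o) : Nat) : Int)
        = List.map (fun (m : Nat) => (m : Int)) (l.set (order.idxOf x) (l.getD (order.idxOf x) 0 ||| 1 <<< o)) :=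
      (List.map_set).symm
    rw [hset1, getD_castRows, shift1_cast, PySem.Int.bor_natCast]
    have hset2 : (List.map (fun (m : Nat) => (m : Int)) (l.set (order.idxOf x) (l.getD (order.idxOf x) 0 ||| 1 <<< o))).set o
          ((((l.set (order.idxOf x) (l.getD (order.idxOf x) 0 ||| 1 <<< o)).getD o 0 ||| 1 <<< order.idxOf x) : Nat) : Int)
        = List.map (fun (m : Nat) => (m : Int))
            ((l.set (order.idxOf x) (l.getD (order.idxOf x) 0 ||| 1 <<< o)).set o
              ((l.set (order.idxOf x) (l.getD (order.idxOf x) 0 ||| 1 <<< o)).getD o 0 ||| 1 <<< order.idxOf x)) :=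
      (List.map_set).symm
    rw [hset2]
  · rfl

def pvBuildBitN (order : List Int) (gates : List (Int × Int × Int × Int)) : List Nat :=
  gates.foldl (fun rows g =>
    if g.2.2.2 ∈ order then
      let o := order.idxOf g.2.2.2
      let r1 := pvEdgeBitN order rows g.2.1 o
      if g.2.2.1 ≥ 0 then pvEdgeBitN order r1 g.2.2.1 o else r1
    else rows)
    (List.replicate order.length 0)

lemma buildBit_cast (order : List Int) (gates : List (Int × Int × Int × Int)) :
    pvBuildBit order gates = (pvBuildBitN order gates).map (fun (m : Nat) => (m : Int)) := by
  rw [pvBuildBit, pvBuildBitN]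
  have hinit : (List.replicate order.length (0 : Int))
      = (List.replicate order.length (0 : Nat)).map (fun (m : Nat) => (m : Int)) := by
    simp
  rw [hinit]
  generalize List.replicate order.length (0:Nat) = rows0
  induction gates generalizing rows0 with
  | nil => rfl
  | cons g gs ih =>
    rw [List.foldl_cons, List.foldl_cons]
    simp only
    split
    · rw [edgeBit_cast]
      split
      · rw [edgeBit_cast]; exact ih _
      · exact ih _
    · exact ih _

lemma idxOf_lt (order : List Int) (x : Int) (h : x ∈ order) :
    order.idxOf x < order.length := List.idxOf_lt_length_of_mem h

lemma getD_idxOf (order : List Int) (x : Int) (h : x ∈ order) :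
    order.getD (order.idxOf x) 0 = x := by
  rw [List.getD_eq_getElem _ _ (idxOf_lt order x h)]
  exact List.getElem_idxOf (idxOf_lt order x h)

lemma getD_eq_iff_idxOf (order : List Int) (horder : order.Nodup) (j : Nat)
    (hj : j < order.length) (y : Int) :
    order.getD j 0 = y ↔ (y ∈ order ∧ j = order.idxOf y) := by
  constructor
  · intro h
    have hy : y ∈ order := by
      rw [← h, List.getD_eq_getElem _ _ hj]
      exact List.getElem_mem _
    refine ⟨hy, ?_⟩
    apply getD_inj order horder j (order.idxOf y) hj (idxOf_lt order y hy)
    rw [h, getD_idxOf order y hy]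
  · rintro ⟨hy, rfl⟩
    exact getD_idxOf order y hy

lemma edgeBitN_length (order : List Int) (rows : List Nat) (x : Int) (o : Nat) :
    (pvEdgeBitN order rows x o).length = rows.length := by
  rw [pvEdgeBitN]
  split
  · simp
  · rfl

lemma edgeBitN_bits (order : List Int) (rows : List Nat) (x : Int) (o i j : Nat)
    (hlen : rows.length = order.length) (hi : i < order.length) (hj : j < order.length) :
    ((pvEdgeBitN order rows x o).getD i 0).testBit j ↔
      (rows.getD i 0).testBit j ∨
        (x ∈ order ∧ ((i = order.idxOf x ∧ j = o) ∨ (i = o ∧ j = order.idxOf x))) := by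
  rw [pvEdgeBitN]
  by_cases hx : x ∈ order
  · rw [if_pos hx]
    simp only
    set A := order.idxOf x with hA
    have haK : A < order.length := idxOf_lt order x hx
    have hAK : A < rows.length := by omega
    have hiR : i < rows.length := by omega
    rw [getD_set_char, getD_set_char, getD_set_char, List.length_set]
    by_cases hoi : o = i
    · rw [if_pos ⟨hoi, by omega⟩]
      by_cases hao : A = o
      · rw [if_pos ⟨hao, hAK⟩]
        have hAi : A = i := by omega
        rw [hAi, Nat.testBit_lor, Nat.testBit_lor, Nat.one_shiftLeft, Nat.one_shiftLeft,
          Nat.testBit_two_pow, Nat.testBit_two_pow]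
        simp only [Bool.or_eq_true, decide_eq_true_eq]
        constructor
        · rintro ((h | h) | h)
          · exact Or.inl h
          · exact Or.inr ⟨hx, Or.inl ⟨trivial, by omega⟩⟩
          · exact Or.inr ⟨hx, Or.inl ⟨trivial, by omega⟩⟩
        · rintro (h | ⟨_, (⟨h1, h2⟩ | ⟨h1, h2⟩)⟩)
          · exact Or.inl (Or.inl h)
          · exact Or.inl (Or.inr (by omega))
          · exact Or.inl (Or.inr (by omega))
      · rw [if_neg (fun hc => hao hc.1)]
        rw [Nat.testBit_lor, Nat.one_shiftLeft, Nat.testBit_two_pow]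
        have hoi' : rows.getD o 0 = rows.getD i 0 := by rw [hoi]
        rw [hoi']
        simp only [Bool.or_eq_true, decide_eq_true_eq]
        constructor
        · rintro (h | h)
          · exact Or.inl h
          · exact Or.inr ⟨hx, Or.inr ⟨by omega, by omega⟩⟩
        · rintro (h | ⟨_, (⟨h1, h2⟩ | ⟨h1, h2⟩)⟩)
          · exact Or.inl h
          · exact absurd (show A = o by omega) hao
          · exact Or.inr (by omega)
    · rw [if_neg (fun hc => hoi hc.1)]
      by_cases hai : A = i
      · rw [if_pos ⟨hai, hAK⟩]
        rw [hai, Nat.testBit_lor, Nat.one_shiftLeft, Nat.testBit_two_pow]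
        simp only [Bool.or_eq_true, decide_eq_true_eq]
        constructor
        · rintro (h | h)
          · exact Or.inl h
          · exact Or.inr ⟨hx, Or.inl ⟨trivial, by omega⟩⟩
        · rintro (h | ⟨_, (⟨h1, h2⟩ | ⟨h1, h2⟩)⟩)
          · exact Or.inl h
          · exact Or.inr (by omega)
          · exact absurd h1.symm hoi
      · rw [if_neg (fun hc => hai hc.1)]
        constructor
        · exact Or.inl
        · rintro (h | ⟨_, (⟨h1, h2⟩ | ⟨h1, h2⟩)⟩)
          · exact h
          · exact absurd h1.symm hai
          · exact absurd h1.symm hoi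
  · rw [if_neg hx]
    constructor
    · exact Or.inl
    · rintro (h | ⟨h1, _⟩)
      · exact h
      · exact absurd h1 hx

lemma mem_of_idxOf_lt (order : List Int) (x : Int) (h : order.idxOf x < order.length) :
    x ∈ order := by
  by_contra hx
  rw [List.idxOf_eq_length_iff.mpr hx] at h
  omega

lemma pair_iff (order : List Int) (horder : order.Nodup) (i j : Nat)
    (hi : i < order.length) (hj : j < order.length) (x y : Int) :
    (i = order.idxOf x ∧ j = order.idxOf y) ↔
      (order.getD i 0 = x ∧ order.getD j 0 = y) := by
  constructor
  · rintro ⟨rfl, rfl⟩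
    exact ⟨getD_idxOf order x (mem_of_idxOf_lt order x hi),
      getD_idxOf order y (mem_of_idxOf_lt order y hj)⟩
  · rintro ⟨h1, h2⟩
    exact ⟨((getD_eq_iff_idxOf order horder i hi x).mp h1).2,
      ((getD_eq_iff_idxOf order horder j hj y).mp h2).2⟩

lemma edge_cond_iff (order : List Int) (horder : order.Nodup) (i j : Nat)
    (hi : i < order.length) (hj : j < order.length) (x y : Int) :
    (x ∈ order ∧ ((i = order.idxOf x ∧ j = order.idxOf y) ∨
        (i = order.idxOf y ∧ j = order.idxOf x))) ↔
      ((order.getD i 0 = x ∧ order.getD j 0 = y) ∨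
        (order.getD i 0 = y ∧ order.getD j 0 = x)) := by
  have e1 := pair_iff order horder i j hi hj x y
  have e2 := pair_iff order horder i j hi hj y x
  have hx1 : order.getD i 0 = x → x ∈ order := by
    rintro rfl
    rw [List.getD_eq_getElem _ _ hi]; exact List.getElem_mem _
  have hx2 : order.getD j 0 = x → x ∈ order := by
    rintro rfl
    rw [List.getD_eq_getElem _ _ hj]; exact List.getElem_mem _
  tauto

set_option maxHeartbeats 2000000 in
lemma gateStepN_bits (order : List Int) (horder : order.Nodup)
    (rows : List Nat) (adj : Int → List Int) (g : Int × Int × Int × Int)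
    (hlen : rows.length = order.length) (i j : Nat)
    (hi : i < order.length) (hj : j < order.length)
    (hbits : (rows.getD i 0).testBit j ↔ order.getD j 0 ∈ adj (order.getD i 0)) :
    ((((if g.2.2.1 ≥ 0 then
          pvEdgeBitN order (pvEdgeBitN order rows g.2.1 (order.idxOf g.2.2.2)) g.2.2.1
            (order.idxOf g.2.2.2)
        else pvEdgeBitN order rows g.2.1 (order.idxOf g.2.2.2))).getD i 0).testBit j) ↔
      order.getD j 0 ∈
        ((let adj1 := updF adj g.2.1 (PySem.Set.add (adj g.2.1) g.2.2.2)
          let adj2 := updF adj1 g.2.2.2 (PySem.Set.add (adj1 g.2.2.2) g.2.1)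
          if g.2.2.1 ≥ 0 then
            let adj3 := updF adj2 g.2.2.1 (PySem.Set.add (adj2 g.2.2.1) g.2.2.2)
            updF adj3 g.2.2.2 (PySem.Set.add (adj3 g.2.2.2) g.2.2.1)
          else adj2) (order.getD i 0)) := by
  rw [memStepA]
  by_cases hge : g.2.2.1 ≥ 0
  · rw [if_pos hge]
    rw [edgeBitN_bits order (pvEdgeBitN order rows g.2.1 (order.idxOf g.2.2.2)) g.2.2.1
        (order.idxOf g.2.2.2) i j (by rw [edgeBitN_length]; exact hlen) hi hj,
      edgeBitN_bits order rows g.2.1 (order.idxOf g.2.2.2) i j hlen hi hj,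
      hbits, edge_cond_iff order horder i j hi hj g.2.1 g.2.2.2,
      edge_cond_iff order horder i j hi hj g.2.2.1 g.2.2.2,
      iff_true_intro hge]
    tauto
  · rw [if_neg hge]
    rw [edgeBitN_bits order rows g.2.1 (order.idxOf g.2.2.2) i j hlen hi hj, hbits,
      edge_cond_iff order horder i j hi hj g.2.1 g.2.2.2]
    tauto

lemma edgeBitN_bound (order : List Int) (rows : List Nat) (x : Int) (o : Nat)
    (hlen : rows.length = order.length) (ho : o < order.length)
    (hb : ∀ i, i < order.length → rows.getD i 0 < 2 ^ order.length) :
    ∀ i, i < order.length → (pvEdgeBitN order rows x o).getD i 0 < 2 ^ order.length := by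
  intro i hi
  rw [pvEdgeBitN]
  split
  · rename_i hx
    have haK : order.idxOf x < order.length := idxOf_lt order x hx
    simp only
    rw [getD_set_char, getD_set_char, getD_set_char]
    have h2o : (1 : Nat) <<< o < 2 ^ order.length := by
      rw [Nat.one_shiftLeft]
      exact Nat.pow_lt_pow_right (by norm_num) ho
    have h2a : (1 : Nat) <<< order.idxOf x < 2 ^ order.length := by
      rw [Nat.one_shiftLeft]
      exact Nat.pow_lt_pow_right (by norm_num) haK
    split
    · apply Nat.or_lt_two_pow _ h2a
      split
      · exact Nat.or_lt_two_pow (hb _ haK) h2o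
      · exact hb _ ho
    · split
      · exact Nat.or_lt_two_pow (hb _ haK) h2o
      · exact hb _ hi
  · exact hb i hi

lemma gateStepGuarded (order : List Int) (horder : order.Nodup)
    (rows : List Nat) (adj : Int → List Int) (g : Int × Int × Int × Int)
    (hlen : rows.length = order.length) (i j : Nat)
    (hi : i < order.length) (hj : j < order.length)
    (hbits : (rows.getD i 0).testBit j ↔ order.getD j 0 ∈ adj (order.getD i 0)) :
    ((((if g.2.2.2 ∈ order then
          (if g.2.2.1 ≥ 0 then
            pvEdgeBitN order (pvEdgeBitN order rows g.2.1 (order.idxOf g.2.2.2)) g.2.2.1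
              (order.idxOf g.2.2.2)
          else pvEdgeBitN order rows g.2.1 (order.idxOf g.2.2.2))
        else rows)).getD i 0).testBit j) ↔
      order.getD j 0 ∈
        ((let adj1 := updF adj g.2.1 (PySem.Set.add (adj g.2.1) g.2.2.2)
          let adj2 := updF adj1 g.2.2.2 (PySem.Set.add (adj1 g.2.2.2) g.2.1)
          if g.2.2.1 ≥ 0 then
            let adj3 := updF adj2 g.2.2.1 (PySem.Set.add (adj2 g.2.2.1) g.2.2.2)
            updF adj3 g.2.2.2 (PySem.Set.add (adj3 g.2.2.2) g.2.2.1)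
          else adj2) (order.getD i 0)) := by
  by_cases hout : g.2.2.2 ∈ order
  · rw [if_pos hout]
    exact gateStepN_bits order horder rows adj g hlen i j hi hj hbits
  · rw [if_neg hout, memStepA]
    have hinot : order.getD i 0 ≠ g.2.2.2 := by
      intro hc
      exact hout (hc ▸ (by rw [List.getD_eq_getElem _ _ hi]; exact List.getElem_mem _))
    have hjnot : order.getD j 0 ≠ g.2.2.2 := by
      intro hc
      exact hout (hc ▸ (by rw [List.getD_eq_getElem _ _ hj]; exact List.getElem_mem _))
    rw [hbits]
    constructor
    · exact Or.inl
    · rintro (h | ((⟨h1, h2⟩ | ⟨h1, h2⟩) | ⟨_, (⟨h1, h2⟩ | ⟨h1, h2⟩)⟩))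
      · exact h
      · exact absurd h2 hjnot
      · exact absurd h1 hinot
      · exact absurd h2 hjnot
      · exact absurd h1 hinot

lemma buildBit_aux (order : List Int) (horder : order.Nodup) :
    ∀ (gates : List (Int × Int × Int × Int)) (adj : Int → List Int) (rows : List Nat),
      rows.length = order.length →
      (∀ i, i < order.length → rows.getD i 0 < 2 ^ order.length) →
      (∀ v, (adj v).Nodup) →
      (∀ x w, w ∈ adj x ↔ x ∈ adj w) →
      (∀ i j, i < order.length → j < order.length →
        ((rows.getD i 0).testBit j ↔ order.getD j 0 ∈ adj (order.getD i 0))) →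
      ((gates.foldl (fun rows g =>
          if g.2.2.2 ∈ order then
            let o := order.idxOf g.2.2.2
            let r1 := pvEdgeBitN order rows g.2.1 o
            if g.2.2.1 ≥ 0 then pvEdgeBitN order r1 g.2.2.1 o else r1
          else rows) rows).length = order.length ∧
       (∀ i, i < order.length → (gates.foldl (fun rows g =>
          if g.2.2.2 ∈ order then
            let o := order.idxOf g.2.2.2
            let r1 := pvEdgeBitN order rows g.2.1 o
            if g.2.2.1 ≥ 0 then pvEdgeBitN order r1 g.2.2.1 o else r1
          else rows) rows).getD i 0 < 2 ^ order.length) ∧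
       (∀ v, ((gates.foldl (fun adj g =>
          let adj1 := updF adj g.2.1 (PySem.Set.add (adj g.2.1) g.2.2.2)
          let adj2 := updF adj1 g.2.2.2 (PySem.Set.add (adj1 g.2.2.2) g.2.1)
          if g.2.2.1 ≥ 0 then
            let adj3 := updF adj2 g.2.2.1 (PySem.Set.add (adj2 g.2.2.1) g.2.2.2)
            updF adj3 g.2.2.2 (PySem.Set.add (adj3 g.2.2.2) g.2.2.1)
          else adj2) adj) v).Nodup) ∧
       (∀ x w, w ∈ (gates.foldl (fun adj g =>
          let adj1 := updF adj g.2.1 (PySem.Set.add (adj g.2.1) g.2.2.2)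
          let adj2 := updF adj1 g.2.2.2 (PySem.Set.add (adj1 g.2.2.2) g.2.1)
          if g.2.2.1 ≥ 0 then
            let adj3 := updF adj2 g.2.2.1 (PySem.Set.add (adj2 g.2.2.1) g.2.2.2)
            updF adj3 g.2.2.2 (PySem.Set.add (adj3 g.2.2.2) g.2.2.1)
          else adj2) adj) x ↔ x ∈ (gates.foldl (fun adj g =>
          let adj1 := updF adj g.2.1 (PySem.Set.add (adj g.2.1) g.2.2.2)
          let adj2 := updF adj1 g.2.2.2 (PySem.Set.add (adj1 g.2.2.2) g.2.1)
          if g.2.2.1 ≥ 0 then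
            let adj3 := updF adj2 g.2.2.1 (PySem.Set.add (adj2 g.2.2.1) g.2.2.2)
            updF adj3 g.2.2.2 (PySem.Set.add (adj3 g.2.2.2) g.2.2.1)
          else adj2) adj) w) ∧
       (∀ i j, i < order.length → j < order.length →
         (((gates.foldl (fun rows g =>
            if g.2.2.2 ∈ order then
              let o := order.idxOf g.2.2.2
              let r1 := pvEdgeBitN order rows g.2.1 o
              if g.2.2.1 ≥ 0 then pvEdgeBitN order r1 g.2.2.1 o else r1
            else rows) rows).getD i 0).testBit j
           ↔ order.getD j 0 ∈ ((gates.foldl (fun adj g =>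
          let adj1 := updF adj g.2.1 (PySem.Set.add (adj g.2.1) g.2.2.2)
          let adj2 := updF adj1 g.2.2.2 (PySem.Set.add (adj1 g.2.2.2) g.2.1)
          if g.2.2.1 ≥ 0 then
            let adj3 := updF adj2 g.2.2.1 (PySem.Set.add (adj2 g.2.2.1) g.2.2.2)
            updF adj3 g.2.2.2 (PySem.Set.add (adj3 g.2.2.2) g.2.2.1)
          else adj2) adj) (order.getD i 0))))) := by
  intro gates
  induction gates with
  | nil =>
    intro adj rows hlen hbnd hA hsym hbits
    exact ⟨hlen, hbnd, hA, hsym, hbits⟩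
  | cons g gs ih =>
    intro adj rows hlen hbnd hA hsym hbits
    simp only [List.foldl_cons]
    apply ih
    · split
      · split
        · rw [edgeBitN_length, edgeBitN_length]; exact hlen
        · rw [edgeBitN_length]; exact hlen
      · exact hlen
    · split
      · rename_i hout
        have ho : order.idxOf g.2.2.2 < order.length := idxOf_lt order g.2.2.2 hout
        split
        · apply edgeBitN_bound order _ g.2.2.1 _ (by rw [edgeBitN_length]; exact hlen) ho
          exact edgeBitN_bound order rows g.2.1 _ hlen ho hbnd
        · exact edgeBitN_bound order rows g.2.1 _ hlen ho hbnd
      · exact hbnd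
    · intro v
      split
      · exact nodup_updAdd _ _ _ (nodup_updAdd _ _ _ (nodup_updAdd _ _ _ (nodup_updAdd _ _ _ hA))) v
      · exact nodup_updAdd _ _ _ (nodup_updAdd _ _ _ hA) v
    · intro x w
      rw [memStepA, memStepA]
      have h1 := hsym x w
      have h2 : (x ≠ w ↔ w ≠ x) := ⟨Ne.symm, Ne.symm⟩
      tauto
    · intro i j hi hj
      exact gateStepGuarded order horder rows adj g hlen i j hi hj (hbits i j hi hj)

-- ===== VERDICT (by name: the statement is the Claim_ definition above) =====
set_option maxHeartbeats 1000000 in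
theorem compute_treewidth_upper_bound_spec : Claim_equal_compute_treewidth_upper_bound := by
  intro n gates _
  unfold Spec_compute_treewidth_upper_bound compute_treewidth_upper_bound
    compute_treewidth_upper_bound_alt
  have horder := pyNodesOrder_nodup n gates
  simp only
  rw [buildBit_cast]
  have hinit := buildBit_aux (pyNodesOrder n gates) horder gates (fun _ => [])
    (List.replicate (pyNodesOrder n gates).length 0)
    (by simp)
    (by
      intro i hi
      have h0 : (List.replicate (pyNodesOrder n gates).length (0:Nat)).getD i 0 = 0 := by
        rw [List.getD_eq_getElem _ _ (by simpa using hi)]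
        simp
      rw [h0]
      exact Nat.two_pow_pos _)
    (fun _ => List.nodup_nil)
    (by intro x w; simp)
    (by
      intro i j hi hj
      have h0 : (List.replicate (pyNodesOrder n gates).length (0:Nat)).getD i 0 = 0 := by
        rw [List.getD_eq_getElem _ _ (by simpa using hi)]
        simp
      rw [h0]
      simp [Nat.zero_testBit])
  obtain ⟨hlenF, hbndF, hAF, hsymF, hbitsF⟩ := hinit
  have hcast : ((1:Int) <<< (pyNodesOrder n gates).length - 1)
      = (((2 ^ (pyNodesOrder n gates).length - 1 : Nat)) : Int) := by
    rw [shift1_cast, Nat.one_shiftLeft, Nat.cast_sub Nat.one_le_two_pow]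
    simp
  rw [hcast]
  -- the initial degree array and row function
  have hrowinit : ∀ i, ((pvBuildBitN (pyNodesOrder n gates) gates).map
        (fun (m : Nat) => (m : Int))).getD i 0
      = (((pvBuildBitN (pyNodesOrder n gates) gates).getD i 0 : Nat) : Int) :=
    fun i => getD_castRows _ i
  have hfull : (List.range (pyNodesOrder n gates).length).filter
      ((2 ^ (pyNodesOrder n gates).length - 1 : Nat).testBit) = List.range (pyNodesOrder n gates).length := by
    apply List.filter_eq_self.mpr
    intro j hj
    rw [Nat.testBit_two_pow_sub_one]
    simpa using List.mem_range.mp hj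
  have hbndF' : ∀ i, i < (pyNodesOrder n gates).length →
      (fun i => (pvBuildBitN (pyNodesOrder n gates) gates).getD i 0) i
        < 2 ^ (pyNodesOrder n gates).length := by
    intro i hi
    have h := hbndF i hi
    simp only
    rw [pvBuildBitN]
    exact h
  have hdeginit : ∀ i ∈ List.range (pyNodesOrder n gates).length,
      (pvDegInit ((pvBuildBitN (pyNodesOrder n gates) gates).map (fun (m : Nat) => (m : Int)))).getD i 0
      = ((PySem.Set.inter ((pvBuildAdjA gates) ((pyNodesOrder n gates).getD i 0))
          (bitFilter (2 ^ (pyNodesOrder n gates).length - 1) (pyNodesOrder n gates))).length : Int) := by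
    intro i hi
    have hiK := List.mem_range.mp hi
    rw [degInit_getD, hrowinit i]
    have hbc := bitCount_card (pyNodesOrder n gates).length
      ((pvBuildBitN (pyNodesOrder n gates) gates).getD i 0) (hbndF' i hiK)
    rw [hbc]
    have hcnt := cnt_inter (pyNodesOrder n gates) horder (pvBuildAdjA gates)
      (fun i => (pvBuildBitN (pyNodesOrder n gates) gates).getD i 0)
      (2 ^ (pyNodesOrder n gates).length - 1)
      (by rw [pvBuildAdjA]; exact hAF)
      (by
        intro a b ha hb _ _
        rw [pvBuildBitN, pvBuildAdjA]
        exact hbitsF a b ha hb)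
      i hiK (by rw [Nat.testBit_two_pow_sub_one]; simpa using hiK)
    rw [← hcnt, pvCnt]
    refine congrArg (fun z : Nat => (z : Int)) (congrArg List.length (List.filter_congr ?_))
    intro j hj
    rw [Nat.testBit_two_pow_sub_one]
    have hjlt : decide (j < (pyNodesOrder n gates).length) = true := by
      simpa using List.mem_range.mp hj
    rw [hjlt, Bool.and_true]
  have helim := elim_eq (pyNodesOrder n gates) horder (pyNodesOrder n gates).length
    (pvBuildAdjA gates)
    ((pvBuildBitN (pyNodesOrder n gates) gates).map (fun (m : Nat) => (m : Int)))
    (pvDegInit ((pvBuildBitN (pyNodesOrder n gates) gates).map (fun (m : Nat) => (m : Int))))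
    (fun i => (pvBuildBitN (pyNodesOrder n gates) gates).getD i 0)
    (2 ^ (pyNodesOrder n gates).length - 1)
    (List.range (pyNodesOrder n gates).length) 0
    (by rw [List.length_map, pvBuildBitN]; exact hlenF)
    (by rw [degInit_length, List.length_map, pvBuildBitN]; exact hlenF)
    (Nat.sub_lt (Nat.two_pow_pos _) (by norm_num))
    (by rw [hfull])
    hrowinit
    hbndF'
    (by rw [pvBuildAdjA]; exact hAF)
    (by rw [pvBuildAdjA]; exact hsymF)
    (by
      intro a b ha hb _ _
      rw [pvBuildBitN, pvBuildAdjA]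
      exact hbitsF a b ha hb)
    hdeginit
  rw [bitFilter_full] at helim
  exact helim
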